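-- pv_equiv track=rewrite | github.com/zazabap/problem-reductions | docs/paper/verify-reductions/adversary_minimum_dominating_set_minimum_sum_multicenter.py | adv_solve_pm
-- ===== SOURCE A (Python) =====
-- from collections import deque
-- from itertools import combinations
-- from typing import Optional
--
-- def adv_bfs_distances(adj: list[set[int]], config: list[int]) -> Optional[list[int]]:
--     """Multi-source BFS from all centers. Returns distances or None if unreachable."""
--     n = len(adj)
--     dist = [-1] * n
--     q = deque()
--     for v in range(n):
--         if config[v] == 1:
--             dist[v] = 0
--             q.append(v)
--     while q:
--         u = q.popleft()
--         for w in adj[u]: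
--             if dist[w] == -1:
--                 dist[w] = dist[u] + 1
--                 q.append(w)
--     if any(d == -1 for d in dist):
--         return None
--     return dist
--
-- def adv_total_distance(adj: list[set[int]], config: list[int]) -> Optional[int]:
--     """Total distance from all vertices to nearest center (unit weights)."""
--     distances = adv_bfs_distances(adj, config)
--     if distances is None:
--         return None
--     return sum(distances)
--
-- def adv_is_feasible_pmedian(adj: list[set[int]], config: list[int], k: int) -> bool:
--     """Check feasibility with B=n-k, unit weights."""
--     n = len(adj)
--     if sum(config) != k:
--         return False
--     total = adv_total_distance(adj, config)
--     if total is None: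
--         return False
--     return total <= n - k
--
-- def adv_solve_pm(adj: list[set[int]], k: int) -> Optional[list[int]]:
--     """Brute-force p-median solver (B=n-k, unit weights)."""
--     n = len(adj)
--     for chosen in combinations(range(n), k):
--         cfg = [0] * n
--         for v in chosen:
--             cfg[v] = 1
--         if adv_is_feasible_pmedian(adj, cfg, k):
--             return cfg
--     return None
-- ===== SOURCE B (Python) =====
-- from itertools import combinations
--
--
-- def _bfs_levels(adj, s):
--     """Single-source level-by-level BFS; dist[v] = None if unreachable from s."""
--     n = len(adj)
--     dist = [None] * n
--     dist[s] = 0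
--     frontier = [s]
--     lev = 0
--     while frontier:
--         nxt = []
--         for u in frontier:
--             for w in adj[u]:
--                 if dist[w] is None:
--                     dist[w] = lev + 1
--                     nxt.append(w)
--         frontier = nxt
--         lev += 1
--     return dist
--
--
-- def adv_solve_pm(adj, k):
--     """Brute-force p-median solver (B=n-k, unit weights): all-pairs table + min."""
--     n = len(adj)
--     if k > n:
--         return None  # no k-subset of the vertices exists; skip building the table
--     table = [_bfs_levels(adj, s) for s in range(n)]
--     for chosen in combinations(range(n), k):
--         total = 0
--         for v in range(n):
--             m = None
--             for c in chosen:
--                 d = table[c][v]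
--                 if d is not None and (m is None or d < m):
--                     m = d
--             if m is None:
--                 total = None
--                 break
--             total += m
--         if total is not None and total <= n - k:
--             cfg = [0] * n
--             for c in chosen:
--                 cfg[c] = 1
--             return cfg
--     return None
-- ===== Notes on version B (the rewrite author's own statement) =====
-- stated objective: alternative
-- what changed: A runs a multi-source BFS (deque) over the whole graph for every candidate k-subset; B returns None immediately when k > n (no k-subset exists), otherwise precomputes an all-pairs distance table with one level-by-level single-source BFS per vertex and scores each subset by summing, per vertex, the minimum table distance over the chosen centers (None = unreachable), keeping A's combination order and tie-breaking.
-- outside the precondition, e.g. on adv_solve_pm([{5}], 0): A returns None, B raises IndexError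
import Mathlib
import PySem

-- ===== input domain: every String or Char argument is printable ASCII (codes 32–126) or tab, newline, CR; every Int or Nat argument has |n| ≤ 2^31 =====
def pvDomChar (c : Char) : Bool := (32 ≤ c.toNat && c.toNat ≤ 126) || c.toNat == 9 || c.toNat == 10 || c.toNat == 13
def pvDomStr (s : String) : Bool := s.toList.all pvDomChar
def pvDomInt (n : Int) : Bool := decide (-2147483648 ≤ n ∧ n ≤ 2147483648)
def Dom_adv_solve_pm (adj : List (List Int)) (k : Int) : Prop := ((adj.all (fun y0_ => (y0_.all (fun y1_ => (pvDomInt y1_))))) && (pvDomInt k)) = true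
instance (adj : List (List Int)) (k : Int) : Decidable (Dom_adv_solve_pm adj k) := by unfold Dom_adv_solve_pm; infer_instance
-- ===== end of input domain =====

-- B replaces A's multi-source BFS per candidate subset by one precomputed all-pairs
-- distance table (a level-by-level BFS from each vertex) plus a min-over-centers sum
-- per subset: a different algorithm of similar cost ('alternative').

-- Python negative list index i on a list of length n reads entry i+n; exact under
-- Pre_ (all adjacency entries w satisfy -n ≤ w < n).
def pmIdx (n : Nat) (w : Int) : Nat := (if w < 0 then w + (n : Int) else w).toNat

-- itertools.combinations(l, k) in its lexicographic order (shared library port).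
def pyCombinations : Nat → List Nat → List (List Nat)
  | 0, _ => [[]]
  | _ + 1, [] => []
  | kk + 1, x :: xs => (pyCombinations kk xs).map (x :: ·) ++ pyCombinations (kk + 1) xs

-- ===== PORT A =====

-- 'while q: u = q.popleft(); for w in adj[u]: …'; fuel n bounds the pops (each
-- enqueue marks a fresh vertex), the fuel guard only makes the recursion total.
def advBfsLoopA (adj : List (List Int)) : Nat → List Int → List Int → List Int
  | 0, dist, _ => dist
  | fuel + 1, dist, q =>
    match q with
    | [] => dist
    | u :: qs =>
      let n := adj.length
      let r := (adj.getD (pmIdx n u) []).foldl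
        (fun (p : List Int × List Int) w =>
          if p.1.getD (pmIdx n w) 0 = -1 then
            (p.1.set (pmIdx n w) (p.1.getD (pmIdx n u) 0 + 1), p.2 ++ [w])
          else p)
        (dist, [])
      advBfsLoopA adj fuel r.1 (qs ++ r.2)

def adv_bfs_distances (adj : List (List Int)) (config : List Int) : Option (List Int) :=
  let n := adj.length
  let init := (List.range n).foldl
    (fun (p : List Int × List Int) v =>
      if config.getD v 0 = 1 then (p.1.set v 0, p.2 ++ [(v : Int)]) else p)
    (List.replicate n (-1), [])
  let dist := advBfsLoopA adj n init.1 init.2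
  if dist.any (fun d => d == -1) then none else some dist

def adv_total_distance (adj : List (List Int)) (config : List Int) : Option Int :=
  match adv_bfs_distances adj config with
  | none => none
  | some distances => some (distances.foldl (· + ·) 0)

def adv_is_feasible_pmedian (adj : List (List Int)) (config : List Int) (k : Int) : Bool :=
  let n := adj.length
  if config.foldl (· + ·) 0 ≠ k then false
  else
    match adv_total_distance adj config with
    | none => false
    | some total => total ≤ (n : Int) - k

def advSolveLoop (adj : List (List Int)) (k : Int) : List (List Nat) → Option (List Int)
  | [] => none
  | chosen :: rest =>
    let cfg := chosen.foldl (fun c v => c.set v 1) (List.replicate adj.length (0 : Int))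
    if adv_is_feasible_pmedian adj cfg k then some cfg else advSolveLoop adj k rest

def adv_solve_pm (adj : List (List Int)) (k : Int) : Option (List Int) :=
  advSolveLoop adj k (pyCombinations k.toNat (List.range adj.length))

-- ===== PORT B =====

-- one round of the level BFS: 'for u in frontier: for w in adj[u]: …'
def altRound (adj : List (List Int)) (lev : Int) (st : List (Option Int) × List Int)
    (frontier : List Int) : List (Option Int) × List Int :=
  frontier.foldl
    (fun p u =>
      (adj.getD (pmIdx adj.length u) []).foldl
        (fun (q : List (Option Int) × List Int) w =>
          if (q.1.getD (pmIdx adj.length w) none).isNone then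
            (q.1.set (pmIdx adj.length w) (some (lev + 1)), q.2 ++ [w])
          else q)
        p)
    st

-- 'while frontier: …'; fuel n bounds the number of rounds (levels).
def altBfsLoop (adj : List (List Int)) : Nat → List (Option Int) → List Int → Int → List (Option Int)
  | 0, dist, _, _ => dist
  | fuel + 1, dist, frontier, lev =>
    match frontier with
    | [] => dist
    | _ =>
      let r := altRound adj lev (dist, []) frontier
      altBfsLoop adj fuel r.1 r.2 (lev + 1)

def altBfs (adj : List (List Int)) (s : Nat) : List (Option Int) :=
  let n := adj.length
  altBfsLoop adj n ((List.replicate n (none : Option Int)).set s (some 0)) [(s : Int)] 0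

-- 'm = None; for c in chosen: d = table[c][v]; if d is not None and (m is None or d < m): m = d'
def altMin (table : List (List (Option Int))) (chosen : List Nat) (v : Nat) : Option Int :=
  chosen.foldl
    (fun m c =>
      match (table.getD c []).getD v none with
      | none => m
      | some d =>
        match m with
        | none => some d
        | some mv => if d < mv then some d else m)
    none

-- 'total = 0; for v in range(n): … break on an unreachable vertex'
def altTotalLoop (table : List (List (Option Int))) (chosen : List Nat) :
    List Nat → Int → Option Int
  | [], total => some total
  | v :: vs, total =>
    match altMin table chosen v with
    | none => none
    | some m => altTotalLoop table chosen vs (total + m)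

def altSolveLoop (adj : List (List Int)) (table : List (List (Option Int))) (k : Int) :
    List (List Nat) → Option (List Int)
  | [] => none
  | chosen :: rest =>
    let n := adj.length
    match altTotalLoop table chosen (List.range n) 0 with
    | none => altSolveLoop adj table k rest
    | some total =>
      if total ≤ (n : Int) - k then
        some (chosen.foldl (fun c v => c.set v 1) (List.replicate n (0 : Int)))
      else altSolveLoop adj table k rest

def adv_solve_pm_alt (adj : List (List Int)) (k : Int) : Option (List Int) :=
  if (adj.length : Int) < k then none
  else
    let n := adj.length
    let table := (List.range n).map (altBfs adj)
    altSolveLoop adj table k (pyCombinations k.toNat (List.range n))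

-- ===== PRECONDITION & SPEC =====
-- Pre_ excludes the inputs on which A raises (k < 0: ValueError from combinations;
-- some BFS-reached adjacency entry outside [-n, n): IndexError on dist[w] — for
-- 1 ≤ k ≤ n every row is eventually read, so in-range entries are required there),
-- and additionally the k = 0 inputs with an out-of-range entry, on which A returns
-- None only because its BFS has no sources and never reads any row, while B's
-- precomputed all-pairs table reads every row and raises.
def Pre_adv_solve_pm (adj : List (List Int)) (k : Int) : Prop :=
  0 ≤ k ∧ ((adj.length : Int) < k ∨
    ∀ row ∈ adj, ∀ w ∈ row, -(adj.length : Int) ≤ w ∧ w < (adj.length : Int))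
instance (adj : List (List Int)) (k : Int) : Decidable (Pre_adv_solve_pm adj k) := by
  unfold Pre_adv_solve_pm; infer_instance

def pvWitness_adv_solve_pm : List (List Int) × Int := ([[1], [0], [-1]], 1)

def Spec_adv_solve_pm (adj : List (List Int)) (k : Int) (out : Option (List Int)) : Prop := out = adv_solve_pm_alt adj k
instance (adj : List (List Int)) (k : Int) (out : Option (List Int)) : Decidable (Spec_adv_solve_pm adj k out) := by unfold Spec_adv_solve_pm; infer_instance

-- ===== CLAIM (what is proved, stated in full; the proofs are below) =====
def Claim_equal_adv_solve_pm : Prop := ∀ (adj : List (List Int)) (k : Int), Dom_adv_solve_pm adj k → Pre_adv_solve_pm adj k → Spec_adv_solve_pm adj k (adv_solve_pm adj k)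

-- ===== LEMMAS AND PROOFS =====

-- ---------- small list-indexing helpers ----------

theorem pvGetD_set_self {α : Type} (l : List α) (i : Nat) (x d : α) (h : i < l.length) :
    (l.set i x).getD i d = x := by
  simp [List.getD, h]

theorem pvGetD_set_ne {α : Type} (l : List α) (i j : Nat) (x d : α) (h : i ≠ j) :
    (l.set i x).getD j d = l.getD j d := by
  simp [List.getD, List.getElem?_set_ne h]

theorem pvGetD_map_range {α : Type} (f : Nat → α) (n v : Nat) (d : α) (h : v < n) :
    ((List.range n).map f).getD v d = f v := by
  rw [List.getD, List.getElem?_map]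
  simp [List.getElem?_range h]

-- ---------- spec-side: reachability layers and first-reach distance ----------

def pmNbr (adj : List (List Int)) (u : Nat) : Finset Nat :=
  ((adj.getD u []).map (pmIdx adj.length)).toFinset

def pmReach (adj : List (List Int)) (S : Finset Nat) : Nat → Finset Nat
  | 0 => S
  | i + 1 => pmReach adj S i ∪ (pmReach adj S i).biUnion (pmNbr adj)

def pmFd (adj : List (List Int)) (S : Finset Nat) (v : Nat) : Option Nat :=
  if h : ∃ i, i ≤ adj.length ∧ v ∈ pmReach adj S i then
    some (Nat.find (h.imp fun _ hi => hi.2))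
  else none

def pmLevel (adj : List (List Int)) (S : Finset Nat) (ℓ : Nat) : Finset Nat :=
  (Finset.range adj.length).filter (fun v => pmFd adj S v = some ℓ)

def dvalA (adj : List (List Int)) (S : Finset Nat) (ℓ : Nat) (v : Nat) : Int :=
  match pmFd adj S v with
  | some i => if i ≤ ℓ then (i : Int) else -1
  | none => -1

def dvalB (adj : List (List Int)) (S : Finset Nat) (ℓ : Nat) (v : Nat) : Option Int :=
  match pmFd adj S v with
  | some i => if i ≤ ℓ then some (i : Int) else none
  | none => none

def targetA (adj : List (List Int)) (S : Finset Nat) : List Int :=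
  (List.range adj.length).map (dvalA adj S adj.length)

def targetB (adj : List (List Int)) (S : Finset Nat) : List (Option Int) :=
  (List.range adj.length).map (dvalB adj S adj.length)

theorem pmIdx_natCast (n v : Nat) : pmIdx n (v : Int) = v := by
  unfold pmIdx
  split
  · omega
  · omega

theorem pmIdx_lt (n : Nat) (w : Int) (h1 : -(n : Int) ≤ w) (h2 : w < (n : Int)) :
    pmIdx n w < n := by
  unfold pmIdx
  split
  · omega
  · omega

theorem pmNbr_subset (adj : List (List Int))
    (hA : ∀ row ∈ adj, ∀ w ∈ row, -(adj.length : Int) ≤ w ∧ w < (adj.length : Int))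
    (u : Nat) : pmNbr adj u ⊆ Finset.range adj.length := by
  intro v hv
  unfold pmNbr at hv
  simp only [List.mem_toFinset, List.mem_map] at hv
  obtain ⟨w, hw, rfl⟩ := hv
  have hrow : adj.getD u [] ∈ adj ∨ adj.getD u [] = [] := by
    by_cases hu : u < adj.length
    · left
      rw [List.getD, List.getElem?_eq_getElem hu]
      exact List.getElem_mem _
    · right
      rw [List.getD, List.getElem?_eq_none (by omega)]
      rfl
  rcases hrow with hrow | hrow
  · have := hA _ hrow _ hw
    simp only [Finset.mem_range]
    exact pmIdx_lt _ _ this.1 this.2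
  · rw [hrow] at hw
    simp at hw

theorem pmReach_mono_succ (adj : List (List Int)) (S : Finset Nat) (i : Nat) :
    pmReach adj S i ⊆ pmReach adj S (i + 1) := by
  intro v hv
  simp [pmReach]
  exact Or.inl hv

theorem pmReach_mono (adj : List (List Int)) (S : Finset Nat) {i j : Nat} (h : i ≤ j) :
    pmReach adj S i ⊆ pmReach adj S j := by
  induction j with
  | zero => 
    have : i = 0 := by omega
    subst this
    exact fun _ h => h
  | succ j ih =>
    rcases Nat.lt_or_ge i (j+1) with hlt | hge
    · exact fun v hv => pmReach_mono_succ adj S j (ih (by omega) hv)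
    · have : i = j + 1 := by omega
      subst this
      exact fun _ h => h

theorem pmReach_subset_range (adj : List (List Int))
    (hA : ∀ row ∈ adj, ∀ w ∈ row, -(adj.length : Int) ≤ w ∧ w < (adj.length : Int))
    (S : Finset Nat) (hS : S ⊆ Finset.range adj.length) (i : Nat) :
    pmReach adj S i ⊆ Finset.range adj.length := by
  induction i with
  | zero => exact hS
  | succ i ih =>
    intro v hv
    simp only [pmReach, Finset.mem_union, Finset.mem_biUnion] at hv
    rcases hv with hv | ⟨u, _, hv⟩
    · exact ih hv
    · exact pmNbr_subset adj hA u hv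

theorem pmReach_union (adj : List (List Int)) (S T : Finset Nat) (i : Nat) :
    pmReach adj (S ∪ T) i = pmReach adj S i ∪ pmReach adj T i := by
  induction i with
  | zero => rfl
  | succ i ih =>
    show pmReach adj (S ∪ T) i ∪ (pmReach adj (S ∪ T) i).biUnion (pmNbr adj) =
      pmReach adj S i ∪ (pmReach adj S i).biUnion (pmNbr adj) ∪
        (pmReach adj T i ∪ (pmReach adj T i).biUnion (pmNbr adj))
    rw [ih]
    ext v
    simp only [Finset.mem_union, Finset.mem_biUnion]
    constructor
    · rintro ((h | h) | ⟨a, (ha | ha), hv⟩)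
      · exact Or.inl (Or.inl h)
      · exact Or.inr (Or.inl h)
      · exact Or.inl (Or.inr ⟨a, ha, hv⟩)
      · exact Or.inr (Or.inr ⟨a, ha, hv⟩)
    · rintro ((h | ⟨a, ha, hv⟩) | (h | ⟨a, ha, hv⟩))
      · exact Or.inl (Or.inl h)
      · exact Or.inr ⟨a, Or.inl ha, hv⟩
      · exact Or.inl (Or.inr h)
      · exact Or.inr ⟨a, Or.inr ha, hv⟩

theorem pmReach_empty (adj : List (List Int)) (i : Nat) : pmReach adj ∅ i = ∅ := by
  induction i with
  | zero => rfl
  | succ i ih =>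
    show pmReach adj ∅ i ∪ (pmReach adj ∅ i).biUnion (pmNbr adj) = ∅
    rw [ih]
    simp

theorem pmReach_stab (adj : List (List Int)) (S : Finset Nat) {i : Nat}
    (h : pmReach adj S (i + 1) = pmReach adj S i) {j : Nat} (hij : i ≤ j) :
    pmReach adj S j = pmReach adj S i := by
  induction j with
  | zero =>
    have : i = 0 := by omega
    subst this; rfl
  | succ j ih =>
    rcases Nat.lt_or_ge i (j+1) with hlt | hge
    · have hj := ih (by omega)
      show pmReach adj S j ∪ (pmReach adj S j).biUnion (pmNbr adj) = pmReach adj S i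
      rw [hj]
      calc pmReach adj S i ∪ (pmReach adj S i).biUnion (pmNbr adj)
          = pmReach adj S (i+1) := rfl
        _ = pmReach adj S i := h
    · have : i = j + 1 := by omega
      subst this; rfl

theorem pmReach_exists_stab (adj : List (List Int))
    (hA : ∀ row ∈ adj, ∀ w ∈ row, -(adj.length : Int) ≤ w ∧ w < (adj.length : Int))
    (S : Finset Nat) (hS : S ⊆ Finset.range adj.length) :
    ∃ i ≤ adj.length, pmReach adj S (i + 1) = pmReach adj S i := by
  by_contra hcon
  push_neg at hcon
  have hgrow : ∀ i ≤ adj.length + 1, i ≤ (pmReach adj S i).card := by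
    intro i
    induction i with
    | zero => omega
    | succ i ih =>
      intro hi
      have hne := hcon i (by omega)
      have hsub := pmReach_mono_succ adj S i
      have hss : pmReach adj S i ⊂ pmReach adj S (i+1) := ⟨hsub, by
        intro hback
        exact hne (Finset.Subset.antisymm hback hsub)⟩
      have := Finset.card_lt_card hss
      have := ih (by omega)
      omega
  have h1 := hgrow (adj.length + 1) le_rfl
  have h2 : (pmReach adj S (adj.length + 1)).card ≤ adj.length := by
    have := Finset.card_le_card (pmReach_subset_range adj hA S hS (adj.length + 1))
    simpa using this
  omega

theorem pmReach_le_len (adj : List (List Int))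
    (hA : ∀ row ∈ adj, ∀ w ∈ row, -(adj.length : Int) ≤ w ∧ w < (adj.length : Int))
    (S : Finset Nat) (hS : S ⊆ Finset.range adj.length) {v j : Nat}
    (h : v ∈ pmReach adj S j) : v ∈ pmReach adj S adj.length := by
  obtain ⟨i, hi, hstab⟩ := pmReach_exists_stab adj hA S hS
  rcases Nat.le_total j adj.length with hj | hj
  · exact pmReach_mono adj S hj h
  · have h1 : pmReach adj S j = pmReach adj S i := pmReach_stab adj S hstab (by omega)
    rw [h1] at h
    exact pmReach_mono adj S hi h

theorem pmFd_eq_some_iff (adj : List (List Int))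
    (hA : ∀ row ∈ adj, ∀ w ∈ row, -(adj.length : Int) ≤ w ∧ w < (adj.length : Int))
    (S : Finset Nat) (hS : S ⊆ Finset.range adj.length) (v i : Nat) :
    pmFd adj S v = some i ↔ v ∈ pmReach adj S i ∧ ∀ j < i, v ∉ pmReach adj S j := by
  unfold pmFd
  split
  · rename_i h
    rw [Option.some_inj, Nat.find_eq_iff]
  · rename_i h
    constructor
    · intro hfalse
      exact absurd hfalse (by simp)
    · rintro ⟨hmem, -⟩
      exact absurd ⟨adj.length, le_rfl, pmReach_le_len adj hA S hS hmem⟩ h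

theorem pmFd_eq_none_iff (adj : List (List Int))
    (hA : ∀ row ∈ adj, ∀ w ∈ row, -(adj.length : Int) ≤ w ∧ w < (adj.length : Int))
    (S : Finset Nat) (hS : S ⊆ Finset.range adj.length) (v : Nat) :
    pmFd adj S v = none ↔ ∀ j, v ∉ pmReach adj S j := by
  unfold pmFd
  split
  · rename_i h
    simp only [reduceCtorEq, false_iff, not_forall, not_not]
    obtain ⟨i, _, hi⟩ := h
    exact ⟨i, hi⟩
  · rename_i h
    simp only [true_iff]
    intro j hj
    exact h ⟨adj.length, le_rfl, pmReach_le_len adj hA S hS hj⟩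

theorem pmFd_le_len (adj : List (List Int)) (S : Finset Nat) {v i : Nat}
    (h : pmFd adj S v = some i) : i ≤ adj.length := by
  unfold pmFd at h
  split at h
  · rename_i hex
    obtain ⟨j, hj, hmem⟩ := hex
    rw [Option.some_inj] at h
    subst h
    exact le_trans (Nat.find_min' _ hmem) hj
  · exact absurd h (by simp)

theorem mem_reach_iff_fd_le (adj : List (List Int))
    (hA : ∀ row ∈ adj, ∀ w ∈ row, -(adj.length : Int) ≤ w ∧ w < (adj.length : Int))
    (S : Finset Nat) (hS : S ⊆ Finset.range adj.length) (v ℓ : Nat) :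
    v ∈ pmReach adj S ℓ ↔ ∃ i, pmFd adj S v = some i ∧ i ≤ ℓ := by
  constructor
  · intro hmem
    unfold pmFd
    split
    · rename_i h
      refine ⟨_, rfl, Nat.find_min' _ hmem⟩
    · rename_i h
      exact absurd ⟨adj.length, le_rfl, pmReach_le_len adj hA S hS hmem⟩ h
  · rintro ⟨i, hi, hle⟩
    rw [pmFd_eq_some_iff adj hA S hS] at hi
    exact pmReach_mono adj S hle hi.1

theorem pmFd_zero_iff (adj : List (List Int))
    (hA : ∀ row ∈ adj, ∀ w ∈ row, -(adj.length : Int) ≤ w ∧ w < (adj.length : Int))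
    (S : Finset Nat) (hS : S ⊆ Finset.range adj.length) (v : Nat) :
    pmFd adj S v = some 0 ↔ v ∈ S := by
  rw [pmFd_eq_some_iff adj hA S hS]
  constructor
  · exact fun h => h.1
  · exact fun h => ⟨h, by omega⟩

theorem pmLevel_zero (adj : List (List Int))
    (hA : ∀ row ∈ adj, ∀ w ∈ row, -(adj.length : Int) ≤ w ∧ w < (adj.length : Int))
    (S : Finset Nat) (hS : S ⊆ Finset.range adj.length) :
    pmLevel adj S 0 = S := by
  ext v
  simp only [pmLevel, Finset.mem_filter, Finset.mem_range]
  rw [pmFd_zero_iff adj hA S hS]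
  constructor
  · exact fun h => h.2
  · intro h
    exact ⟨by simpa using hS h, h⟩

theorem pmLevel_succ_eq_sdiff (adj : List (List Int))
    (hA : ∀ row ∈ adj, ∀ w ∈ row, -(adj.length : Int) ≤ w ∧ w < (adj.length : Int))
    (S : Finset Nat) (hS : S ⊆ Finset.range adj.length) (ℓ : Nat) :
    pmLevel adj S (ℓ + 1) = pmReach adj S (ℓ + 1) \ pmReach adj S ℓ := by
  ext v
  simp only [pmLevel, Finset.mem_filter, Finset.mem_range, Finset.mem_sdiff]
  constructor
  · intro ⟨hv, hfd⟩
    rw [pmFd_eq_some_iff adj hA S hS] at hfd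
    exact ⟨hfd.1, hfd.2 ℓ (by omega)⟩
  · intro ⟨hmem, hnot⟩
    have hv : v < adj.length := by
      simpa using pmReach_subset_range adj hA S hS (ℓ + 1) hmem
    refine ⟨hv, ?_⟩
    obtain ⟨i, hi, hle⟩ := (mem_reach_iff_fd_le adj hA S hS v (ℓ + 1)).1 hmem
    have : ¬ i ≤ ℓ := by
      intro hle'
      exact hnot ((mem_reach_iff_fd_le adj hA S hS v ℓ).2 ⟨i, hi, hle'⟩)
    have : i = ℓ + 1 := by omega
    rwa [this] at hi

theorem pmReach_succ_level (adj : List (List Int))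
    (hA : ∀ row ∈ adj, ∀ w ∈ row, -(adj.length : Int) ≤ w ∧ w < (adj.length : Int))
    (S : Finset Nat) (hS : S ⊆ Finset.range adj.length) (ℓ : Nat) :
    pmReach adj S (ℓ + 1) = pmReach adj S ℓ ∪ (pmLevel adj S ℓ).biUnion (pmNbr adj) := by
  ext v
  show v ∈ pmReach adj S ℓ ∪ (pmReach adj S ℓ).biUnion (pmNbr adj) ↔ _
  simp only [Finset.mem_union, Finset.mem_biUnion]
  constructor
  · rintro (hv | ⟨u, hu, hv⟩)
    · exact Or.inl hv
    · obtain ⟨i, hi, hle⟩ := (mem_reach_iff_fd_le adj hA S hS u ℓ).1 hu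
      rcases Nat.lt_or_ge i ℓ with hlt | hge
      · left
        have humem : u ∈ pmReach adj S i := ((pmFd_eq_some_iff adj hA S hS u i).1 hi).1
        have hv1 : v ∈ pmReach adj S (i + 1) := by
          show v ∈ pmReach adj S i ∪ (pmReach adj S i).biUnion (pmNbr adj)
          exact Finset.mem_union_right _ (Finset.mem_biUnion.2 ⟨u, humem, hv⟩)
        exact pmReach_mono adj S (by omega) hv1
      · have hieq : i = ℓ := by omega
        rw [hieq] at hi
        right
        refine ⟨u, ?_, hv⟩
        simp only [pmLevel, Finset.mem_filter, Finset.mem_range]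
        exact ⟨by simpa using pmReach_subset_range adj hA S hS ℓ hu, hi⟩
  · rintro (hv | ⟨u, hu, hv⟩)
    · exact Or.inl hv
    · right
      refine ⟨u, ?_, hv⟩
      simp only [pmLevel, Finset.mem_filter] at hu
      rw [mem_reach_iff_fd_le adj hA S hS]
      exact ⟨ℓ, hu.2, le_rfl⟩

theorem dvalA_eq_neg_one_iff (adj : List (List Int))
    (hA : ∀ row ∈ adj, ∀ w ∈ row, -(adj.length : Int) ≤ w ∧ w < (adj.length : Int))
    (S : Finset Nat) (hS : S ⊆ Finset.range adj.length) (ℓ v : Nat) :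
    dvalA adj S ℓ v = -1 ↔ v ∉ pmReach adj S ℓ := by
  rcases h : pmFd adj S v with _ | i
  · have hn := (pmFd_eq_none_iff adj hA S hS v).1 h
    simp [dvalA, h, hn ℓ]
  · by_cases hle : i ≤ ℓ
    · have hmem : v ∈ pmReach adj S ℓ :=
        (mem_reach_iff_fd_le adj hA S hS v ℓ).2 ⟨i, h, hle⟩
      simp only [dvalA, h, if_pos hle]
      constructor
      · intro habs
        exact absurd habs (by omega)
      · intro hnot
        exact absurd hmem hnot
    · have hnot : v ∉ pmReach adj S ℓ := by
        intro hmem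
        obtain ⟨i', hi', hle'⟩ := (mem_reach_iff_fd_le adj hA S hS v ℓ).1 hmem
        rw [h, Option.some_inj] at hi'
        omega
      simp [dvalA, h, hle, hnot]

theorem dvalB_eq_none_iff (adj : List (List Int))
    (hA : ∀ row ∈ adj, ∀ w ∈ row, -(adj.length : Int) ≤ w ∧ w < (adj.length : Int))
    (S : Finset Nat) (hS : S ⊆ Finset.range adj.length) (ℓ v : Nat) :
    dvalB adj S ℓ v = none ↔ v ∉ pmReach adj S ℓ := by
  rcases h : pmFd adj S v with _ | i
  · have hn := (pmFd_eq_none_iff adj hA S hS v).1 h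
    simp [dvalB, h, hn ℓ]
  · by_cases hle : i ≤ ℓ
    · have hmem : v ∈ pmReach adj S ℓ :=
        (mem_reach_iff_fd_le adj hA S hS v ℓ).2 ⟨i, h, hle⟩
      simp [dvalB, h, hle, hmem]
    · have hnot : v ∉ pmReach adj S ℓ := by
        intro hmem
        obtain ⟨i', hi', hle'⟩ := (mem_reach_iff_fd_le adj hA S hS v ℓ).1 hmem
        rw [h, Option.some_inj] at hi'
        omega
      simp [dvalB, h, hle, hnot]

theorem dvalA_succ (adj : List (List Int)) (S : Finset Nat) (ℓ v : Nat) :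
    dvalA adj S (ℓ + 1) v =
      if pmFd adj S v = some (ℓ + 1) then ((ℓ : Int) + 1) else dvalA adj S ℓ v := by
  rcases h : pmFd adj S v with _ | i
  · simp [dvalA, h]
  · simp only [dvalA, h, Option.some_inj]
    by_cases he : i = ℓ + 1
    · subst he
      rw [if_pos rfl, if_pos (le_refl (ℓ + 1))]
      push_cast
      ring
    · rw [if_neg he]
      by_cases hle : i ≤ ℓ
      · rw [if_pos (by omega), if_pos hle]
      · rw [if_neg (by omega), if_neg hle]

theorem dvalB_succ (adj : List (List Int)) (S : Finset Nat) (ℓ v : Nat) :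
    dvalB adj S (ℓ + 1) v =
      if pmFd adj S v = some (ℓ + 1) then some ((ℓ : Int) + 1) else dvalB adj S ℓ v := by
  rcases h : pmFd adj S v with _ | i
  · simp [dvalB, h]
  · simp only [dvalB, h, Option.some_inj]
    by_cases he : i = ℓ + 1
    · subst he
      rw [if_pos rfl, if_pos (le_refl (ℓ + 1)), Option.some_inj]
      push_cast
      ring
    · rw [if_neg he]
      by_cases hle : i ≤ ℓ
      · rw [if_pos (by omega), if_pos hle]
      · rw [if_neg (by omega), if_neg hle]

theorem dvalA_of_fd (adj : List (List Int)) (S : Finset Nat) (ℓ v i : Nat)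
    (h : pmFd adj S v = some i) (hi : i ≤ ℓ) : dvalA adj S ℓ v = (i : Int) := by
  simp [dvalA, h, hi]

-- ---------- A-side: queue BFS = level-by-level processing ----------

def innA (adj : List (List Int)) (u : Int) (p : List Int × List Int) (w : Int) :
    List Int × List Int :=
  if p.1.getD (pmIdx adj.length w) 0 = -1 then
    (p.1.set (pmIdx adj.length w) (p.1.getD (pmIdx adj.length u) 0 + 1), p.2 ++ [w])
  else p

def stepA (adj : List (List Int)) (p : List Int × List Int) (u : Int) : List Int × List Int :=
  (adj.getD (pmIdx adj.length u) []).foldl (innA adj u) p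

theorem innA_snd_factor (adj : List (List Int)) (u : Int) (ws : List Int) :
    ∀ (d acc : List Int),
    ws.foldl (innA adj u) (d, acc) =
      ((ws.foldl (innA adj u) (d, [])).1, acc ++ (ws.foldl (innA adj u) (d, [])).2) := by
  induction ws with
  | nil => intro d acc; simp
  | cons w ws ih =>
    intro d acc
    simp only [List.foldl_cons, innA]
    split
    · rw [ih _ (acc ++ [w]), ih _ ([] ++ [w])]
      simp
    · exact ih d acc

theorem advBfsLoopA_cons (adj : List (List Int)) (fuel : Nat) (dist : List Int)
    (u : Int) (qs : List Int) :
    advBfsLoopA adj (fuel + 1) dist (u :: qs) =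
      advBfsLoopA adj fuel (stepA adj (dist, []) u).1 (qs ++ (stepA adj (dist, []) u).2) := by
  rfl

theorem advBfsLoopA_nil (adj : List (List Int)) (fuel : Nat) (dist : List Int) :
    advBfsLoopA adj fuel dist [] = dist := by
  cases fuel <;> rfl

theorem stepA_snd_factor (adj : List (List Int)) (d : List Int) (acc : List Int) (u : Int) :
    stepA adj (d, acc) u = ((stepA adj (d, []) u).1, acc ++ (stepA adj (d, []) u).2) := by
  exact innA_snd_factor adj u _ d acc

theorem foldl_stepA_snd_factor (adj : List (List Int)) (front : List Int)
    (d : List Int) (acc : List Int) :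
    front.foldl (stepA adj) (d, acc) =
      ((front.foldl (stepA adj) (d, [])).1, acc ++ (front.foldl (stepA adj) (d, [])).2) := by
  induction front generalizing d acc with
  | nil => simp
  | cons u front ih =>
    simp only [List.foldl_cons]
    rw [stepA_snd_factor adj d acc u, ih _ (acc ++ (stepA adj (d, []) u).2),
      stepA_snd_factor adj d [] u, ih _ ([] ++ (stepA adj (d, []) u).2)]
    simp

theorem advBfsLoopA_append (adj : List (List Int)) (q1 : List Int) :
    ∀ (fuel : Nat) (d : List Int) (q2 : List Int),
    advBfsLoopA adj (q1.length + fuel) d (q1 ++ q2) =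
      advBfsLoopA adj fuel (q1.foldl (stepA adj) (d, [])).1
        (q2 ++ (q1.foldl (stepA adj) (d, [])).2) := by
  induction q1 with
  | nil =>
    intro fuel d q2
    simp
  | cons u q1 ih =>
    intro fuel d q2
    have hlen : (u :: q1).length + fuel = (q1.length + fuel) + 1 := by
      simp [List.length_cons]
      omega
    rw [hlen, List.cons_append, advBfsLoopA_cons]
    have hassoc : (q1 ++ q2) ++ (stepA adj (d, []) u).2 =
        q1 ++ (q2 ++ (stepA adj (d, []) u).2) := by
      simp [List.append_assoc]
    rw [hassoc, ih fuel (stepA adj (d, []) u).1 (q2 ++ (stepA adj (d, []) u).2)]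
    rw [List.foldl_cons, stepA_snd_factor adj d [] u,
      foldl_stepA_snd_factor adj q1 (stepA adj (d, []) u).1 ([] ++ (stepA adj (d, []) u).2)]
    simp [List.append_assoc]

-- mid-level invariant for the dist/accumulator pair while a level is processed
def GoodA (adj : List (List Int)) (S : Finset Nat) (ℓ : Nat) (N : Finset Nat)
    (p : List Int × List Int) : Prop :=
  p.1.length = adj.length ∧
  (p.2.map (pmIdx adj.length)).Nodup ∧
  (p.2.map (pmIdx adj.length)).toFinset = N \ pmReach adj S ℓ ∧
  ∀ v < adj.length, p.1.getD v 0 =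
    if v ∈ (p.2.map (pmIdx adj.length)).toFinset then ((ℓ : Int) + 1)
    else dvalA adj S ℓ v

theorem innA_fold_good (adj : List (List Int))
    (hA : ∀ row ∈ adj, ∀ w ∈ row, -(adj.length : Int) ≤ w ∧ w < (adj.length : Int))
    (S : Finset Nat) (hS : S ⊆ Finset.range adj.length) (ℓ : Nat) (u : Int)
    (hu : pmFd adj S (pmIdx adj.length u) = some ℓ) :
    ∀ (ws : List Int), (∀ w ∈ ws, -(adj.length : Int) ≤ w ∧ w < (adj.length : Int)) →
    ∀ (N : Finset Nat) (p : List Int × List Int), GoodA adj S ℓ N p →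
    GoodA adj S ℓ (N ∪ (ws.map (pmIdx adj.length)).toFinset) (ws.foldl (innA adj u) p) := by
  have huv_mem : pmIdx adj.length u ∈ pmReach adj S ℓ :=
    ((pmFd_eq_some_iff adj hA S hS _ ℓ).1 hu).1
  have huv_lt : pmIdx adj.length u < adj.length := by
    simpa using pmReach_subset_range adj hA S hS ℓ huv_mem
  intro ws
  induction ws with
  | nil =>
    intro _ N p hg
    simpa using hg
  | cons w ws ih =>
    intro hws N p hg
    have hw := hws w (by simp)
    have hws' : ∀ w' ∈ ws, -(adj.length : Int) ≤ w' ∧ w' < (adj.length : Int) := by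
      intro w' hw'
      exact hws w' (List.mem_cons_of_mem _ hw')
    have hwlt : pmIdx adj.length w < adj.length := pmIdx_lt _ _ hw.1 hw.2
    obtain ⟨hlen, hnd, hset, hval⟩ := hg
    have hsetiff : ∀ x, x ∈ (p.2.map (pmIdx adj.length)).toFinset ↔
        x ∈ N ∧ x ∉ pmReach adj S ℓ := by
      intro x
      rw [hset]
      simp [Finset.mem_sdiff]
    have hdu : p.1.getD (pmIdx adj.length u) 0 = (ℓ : Int) := by
      rw [hval _ huv_lt, if_neg (by
        rw [hsetiff]
        rintro ⟨-, hno⟩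
        exact hno huv_mem)]
      exact dvalA_of_fd adj S ℓ _ ℓ hu le_rfl
    have hstep : GoodA adj S ℓ (N ∪ {pmIdx adj.length w}) (innA adj u p w) := by
      unfold innA
      by_cases hacc : pmIdx adj.length w ∈ (p.2.map (pmIdx adj.length)).toFinset
      · rw [if_neg (by
          rw [hval _ hwlt, if_pos hacc]
          intro habs
          have : (0 : Int) ≤ (ℓ : Int) := by positivity
          omega)]
        refine ⟨hlen, hnd, ?_, ?_⟩
        · rw [hset]
          ext x
          have hmem := (hsetiff _).1 hacc
          simp only [Finset.mem_sdiff, Finset.mem_union, Finset.mem_singleton]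
          constructor
          · rintro ⟨hx, hnx⟩
            exact ⟨Or.inl hx, hnx⟩
          · rintro ⟨hx | rfl, hnx⟩
            · exact ⟨hx, hnx⟩
            · exact ⟨hmem.1, hnx⟩
        · exact hval
      · by_cases hr : pmIdx adj.length w ∈ pmReach adj S ℓ
        · rw [if_neg (by
            rw [hval _ hwlt, if_neg hacc]
            rw [dvalA_eq_neg_one_iff adj hA S hS]
            simp [hr])]
          refine ⟨hlen, hnd, ?_, ?_⟩
          · rw [hset]
            ext x
            simp only [Finset.mem_sdiff, Finset.mem_union, Finset.mem_singleton]
            constructor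
            · rintro ⟨hx, hnx⟩
              exact ⟨Or.inl hx, hnx⟩
            · rintro ⟨hx | rfl, hnx⟩
              · exact ⟨hx, hnx⟩
              · exact absurd hr hnx
          · exact hval
        · rw [if_pos (by
            rw [hval _ hwlt, if_neg hacc]
            rw [dvalA_eq_neg_one_iff adj hA S hS]
            exact hr)]
          have hnotin : pmIdx adj.length w ∉ p.2.map (pmIdx adj.length) := by
            intro habs
            exact hacc (List.mem_toFinset.2 habs)
          refine ⟨by simpa using hlen, ?_, ?_, ?_⟩
          · rw [List.map_append]
            simp only [List.map_cons, List.map_nil]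
            rw [List.nodup_append]
            exact ⟨hnd, List.nodup_singleton _, by simpa using hnotin⟩
          · rw [List.map_append]
            simp only [List.map_cons, List.map_nil]
            ext x
            simp only [List.toFinset_append, Finset.mem_union, List.mem_toFinset,
              List.mem_cons, List.not_mem_nil, or_false, Finset.mem_sdiff,
              Finset.mem_singleton]
            have hx1 := hsetiff x
            rw [List.mem_toFinset] at hx1
            rw [hx1]
            constructor
            · rintro (⟨hx, hnx⟩ | rfl)
              · exact ⟨Or.inl hx, hnx⟩
              · exact ⟨Or.inr rfl, hr⟩
            · rintro ⟨hx | rfl, hnx⟩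
              · exact Or.inl ⟨hx, hnx⟩
              · exact Or.inr rfl
          · intro v hv
            by_cases hvw : v = pmIdx adj.length w
            · subst hvw
              rw [pvGetD_set_self _ _ _ _ (by omega), hdu]
              rw [if_pos (by
                rw [List.map_append]
                simp)]
            · rw [pvGetD_set_ne _ _ _ _ _ (fun h => hvw h.symm), hval _ hv]
              have hmemiff : v ∈ ((p.2 ++ [w]).map (pmIdx adj.length)).toFinset ↔
                  v ∈ (p.2.map (pmIdx adj.length)).toFinset := by
                rw [List.map_append]
                simp only [List.map_cons, List.map_nil, List.toFinset_append,
                  Finset.mem_union, List.mem_toFinset, List.mem_cons,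
                  List.not_mem_nil, or_false]
                constructor
                · rintro (hx | rfl)
                  · exact hx
                  · exact absurd rfl hvw
                · intro hx
                  exact Or.inl hx
              rw [if_congr hmemiff rfl rfl]
    have hfinal := ih hws' (N ∪ {pmIdx adj.length w}) (innA adj u p w) hstep
    rw [List.foldl_cons]
    have hsets : (N ∪ {pmIdx adj.length w}) ∪ (ws.map (pmIdx adj.length)).toFinset =
        N ∪ ((w :: ws).map (pmIdx adj.length)).toFinset := by
      ext x
      simp only [List.map_cons, List.toFinset_cons, Finset.mem_union,
        Finset.mem_singleton, Finset.mem_insert, List.mem_toFinset]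
      tauto
    rwa [hsets] at hfinal

theorem stepA_good (adj : List (List Int))
    (hA : ∀ row ∈ adj, ∀ w ∈ row, -(adj.length : Int) ≤ w ∧ w < (adj.length : Int))
    (S : Finset Nat) (hS : S ⊆ Finset.range adj.length) (ℓ : Nat) (N : Finset Nat)
    (p : List Int × List Int) (u : Int)
    (hg : GoodA adj S ℓ N p)
    (hu : pmFd adj S (pmIdx adj.length u) = some ℓ) :
    GoodA adj S ℓ (N ∪ pmNbr adj (pmIdx adj.length u)) (stepA adj p u) := by
  have huv_mem : pmIdx adj.length u ∈ pmReach adj S ℓ :=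
    ((pmFd_eq_some_iff adj hA S hS _ ℓ).1 hu).1
  have huv_lt : pmIdx adj.length u < adj.length := by
    simpa using pmReach_subset_range adj hA S hS ℓ huv_mem
  have hws : ∀ w ∈ adj.getD (pmIdx adj.length u) [],
      -(adj.length : Int) ≤ w ∧ w < (adj.length : Int) := by
    intro w hw
    have hrow : adj.getD (pmIdx adj.length u) [] ∈ adj := by
      rw [List.getD, List.getElem?_eq_getElem huv_lt]
      exact List.getElem_mem _
    exact hA _ hrow _ hw
  exact innA_fold_good adj hA S hS ℓ u hu _ hws N p hg

theorem foldl_stepA_good (adj : List (List Int))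
    (hA : ∀ row ∈ adj, ∀ w ∈ row, -(adj.length : Int) ≤ w ∧ w < (adj.length : Int))
    (S : Finset Nat) (hS : S ⊆ Finset.range adj.length) (ℓ : Nat) (front : List Int) :
    ∀ (N : Finset Nat) (p : List Int × List Int), GoodA adj S ℓ N p →
    (∀ u ∈ front, pmFd adj S (pmIdx adj.length u) = some ℓ) →
    GoodA adj S ℓ (N ∪ ((front.map (pmIdx adj.length)).toFinset).biUnion (pmNbr adj))
      (front.foldl (stepA adj) p) := by
  induction front with
  | nil =>
    intro N p hg _
    simpa using hg
  | cons u front ih =>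
    intro N p hg hfr
    have h1 := stepA_good adj hA S hS ℓ N p u hg (hfr u (by simp))
    have h2 := ih _ _ h1 (fun u' hu' => hfr u' (List.mem_cons_of_mem _ hu'))
    rw [List.foldl_cons]
    have hsets : (N ∪ pmNbr adj (pmIdx adj.length u)) ∪
        ((front.map (pmIdx adj.length)).toFinset).biUnion (pmNbr adj) =
        N ∪ (((u :: front).map (pmIdx adj.length)).toFinset).biUnion (pmNbr adj) := by
      ext x
      simp only [List.map_cons, List.toFinset_cons, Finset.mem_union,
        Finset.mem_biUnion, Finset.mem_insert, List.mem_toFinset]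
      constructor
      · rintro ((hx | hx) | ⟨a, ha, hx⟩)
        · exact Or.inl hx
        · exact Or.inr ⟨_, Or.inl rfl, hx⟩
        · exact Or.inr ⟨a, Or.inr ha, hx⟩
      · rintro (hx | ⟨a, (rfl | ha), hx⟩)
        · exact Or.inl (Or.inl hx)
        · exact Or.inl (Or.inr hx)
        · exact Or.inr ⟨a, ha, hx⟩
    rwa [hsets] at h2

-- level invariant for the A-side queue BFS
def InvA (adj : List (List Int)) (S : Finset Nat) (ℓ : Nat) (d : List Int)
    (front : List Int) : Prop :=
  d.length = adj.length ∧
  (front.map (pmIdx adj.length)).Nodup ∧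
  (front.map (pmIdx adj.length)).toFinset = pmLevel adj S ℓ ∧
  ∀ v < adj.length, d.getD v 0 = dvalA adj S ℓ v

theorem procA_inv (adj : List (List Int))
    (hA : ∀ row ∈ adj, ∀ w ∈ row, -(adj.length : Int) ≤ w ∧ w < (adj.length : Int))
    (S : Finset Nat) (hS : S ⊆ Finset.range adj.length) (ℓ : Nat) (d : List Int)
    (front : List Int) (hinv : InvA adj S ℓ d front) :
    InvA adj S (ℓ + 1) (front.foldl (stepA adj) (d, [])).1
      (front.foldl (stepA adj) (d, [])).2 := by
  obtain ⟨hlen, hnd, hset, hval⟩ := hinv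
  have hg0 : GoodA adj S ℓ ∅ (d, []) := by
    refine ⟨hlen, by simp, by simp, ?_⟩
    intro v hv
    simpa using hval v hv
  have hfr : ∀ u ∈ front, pmFd adj S (pmIdx adj.length u) = some ℓ := by
    intro u hu
    have : pmIdx adj.length u ∈ (front.map (pmIdx adj.length)).toFinset := by
      simp only [List.mem_toFinset, List.mem_map]
      exact ⟨u, hu, rfl⟩
    rw [hset] at this
    simp only [pmLevel, Finset.mem_filter] at this
    exact this.2
  have hg := foldl_stepA_good adj hA S hS ℓ front ∅ (d, []) hg0 hfr
  obtain ⟨hlen', hnd', hset', hval'⟩ := hg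
  have haccs : (∅ ∪ ((front.map (pmIdx adj.length)).toFinset).biUnion (pmNbr adj)) \
      pmReach adj S ℓ = pmLevel adj S (ℓ + 1) := by
    rw [hset, pmLevel_succ_eq_sdiff adj hA S hS,
      pmReach_succ_level adj hA S hS ℓ]
    ext x
    simp only [Finset.empty_union, Finset.mem_sdiff, Finset.mem_union]
    tauto
  rw [haccs] at hset'
  refine ⟨hlen', hnd', hset', ?_⟩
  intro v hv
  rw [hval' v hv, hset', dvalA_succ]
  have : v ∈ pmLevel adj S (ℓ + 1) ↔ pmFd adj S v = some (ℓ + 1) := by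
    simp only [pmLevel, Finset.mem_filter, Finset.mem_range]
    exact ⟨fun h => h.2, fun h => ⟨hv, h⟩⟩
  rw [if_congr this rfl rfl]

theorem invA_front_length (adj : List (List Int)) (S : Finset Nat) (ℓ : Nat)
    (d : List Int) (front : List Int) (hinv : InvA adj S ℓ d front) :
    front.length = (pmLevel adj S ℓ).card := by
  obtain ⟨-, hnd, hset, -⟩ := hinv
  rw [← hset, List.toFinset_card_of_nodup hnd, List.length_map]

theorem dvalA_stab (adj : List (List Int))
    (hA : ∀ row ∈ adj, ∀ w ∈ row, -(adj.length : Int) ≤ w ∧ w < (adj.length : Int))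
    (S : Finset Nat) (hS : S ⊆ Finset.range adj.length) (ℓ : Nat)
    (hstab : pmReach adj S (ℓ + 1) = pmReach adj S ℓ) (v : Nat) :
    dvalA adj S ℓ v = dvalA adj S adj.length v := by
  rcases h : pmFd adj S v with _ | i
  · simp [dvalA, h]
  · have hmem : v ∈ pmReach adj S i := ((pmFd_eq_some_iff adj hA S hS v i).1 h).1
    have hle : i ≤ ℓ := by
      rcases Nat.le_total i ℓ with hle | hge
      · exact hle
      · have hri : pmReach adj S i = pmReach adj S ℓ := pmReach_stab adj S hstab hge
        rw [hri] at hmem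
        obtain ⟨i', hi', hle'⟩ := (mem_reach_iff_fd_le adj hA S hS v ℓ).1 hmem
        rw [h, Option.some_inj] at hi'
        omega
    have hlen : i ≤ adj.length := pmFd_le_len adj S h
    simp [dvalA, h, hle, hlen]

theorem runA (adj : List (List Int))
    (hA : ∀ row ∈ adj, ∀ w ∈ row, -(adj.length : Int) ≤ w ∧ w < (adj.length : Int))
    (S : Finset Nat) (hS : S ⊆ Finset.range adj.length) :
    ∀ (fuel ℓ : Nat) (d : List Int) (front : List Int),
    InvA adj S ℓ d front → front ≠ [] →
    adj.length - (pmReach adj S ℓ).card + front.length ≤ fuel →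
    advBfsLoopA adj fuel d front = targetA adj S := by
  intro fuel
  induction fuel using Nat.strong_induction_on with
  | _ fuel ih =>
  intro ℓ d front hinv hne hfuel
  have hflen : front.length = (pmLevel adj S ℓ).card :=
    invA_front_length adj S ℓ d front hinv
  have hfpos : 0 < front.length := List.length_pos_of_ne_nil hne
  have hinv' := procA_inv adj hA S hS ℓ d front hinv
  have hfe : fuel = front.length + (fuel - front.length) := by omega
  have happ := advBfsLoopA_append adj front (fuel - front.length) d []
  rw [List.append_nil, List.nil_append] at happ
  rw [hfe, happ]
  set d' := (front.foldl (stepA adj) (d, [])).1 with hd'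
  set new := (front.foldl (stepA adj) (d, [])).2 with hnew'
  by_cases hnew : new = []
  · rw [hnew, advBfsLoopA_nil]
    -- the frontier died out: the reach sets are stable from level ℓ + 1 on
    have hlev1 : pmLevel adj S (ℓ + 1) = ∅ := by
      have := hinv'.2.2.1
      rw [hnew] at this
      simpa using this.symm
    have hstab : pmReach adj S (ℓ + 1 + 1) = pmReach adj S (ℓ + 1) := by
      have hsd : pmReach adj S (ℓ + 1) \ pmReach adj S ℓ = ∅ := by
        rw [← pmLevel_succ_eq_sdiff adj hA S hS, hlev1]
      have hsub : pmReach adj S (ℓ + 1) ⊆ pmReach adj S ℓ :=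
        Finset.sdiff_eq_empty_iff_subset.1 hsd
      have heq : pmReach adj S (ℓ + 1) = pmReach adj S ℓ :=
        Finset.Subset.antisymm hsub (pmReach_mono_succ adj S ℓ)
      calc pmReach adj S (ℓ + 2) = pmReach adj S ℓ :=
            pmReach_stab adj S heq (by omega)
        _ = pmReach adj S (ℓ + 1) := heq.symm
    have hlen' : d'.length = adj.length := hinv'.1
    have hval' := hinv'.2.2.2
    apply List.ext_getElem
    · simp [targetA, hlen']
    · intro v hv1 hv2
      have hvn : v < adj.length := by rwa [hlen'] at hv1
      have h1 : d'.getD v 0 = d'[v] := by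
        rw [List.getD, List.getElem?_eq_getElem hv1]
        rfl
      rw [← h1, hval' v hvn, dvalA_stab adj hA S hS (ℓ + 1) hstab v]
      simp [targetA, hvn]
  · have hnd1 := hinv'.2.1
    have hset1 := hinv'.2.2.1
    have hnlen : new.length = (pmLevel adj S (ℓ + 1)).card :=
      invA_front_length adj S (ℓ + 1) d' new hinv'
    have hcard1 : (pmLevel adj S (ℓ + 1)).card + (pmReach adj S ℓ).card =
        (pmReach adj S (ℓ + 1)).card := by
      rw [pmLevel_succ_eq_sdiff adj hA S hS]
      exact Finset.card_sdiff_add_card_eq_card (pmReach_mono_succ adj S ℓ)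
    have hcardle : (pmReach adj S (ℓ + 1)).card ≤ adj.length := by
      have := Finset.card_le_card (pmReach_subset_range adj hA S hS (ℓ + 1))
      simpa using this
    exact ih (fuel - front.length) (by omega) (ℓ + 1) d' new hinv' hnew (by omega)

-- ---------- B-side: level BFS from a single source ----------

def stepB (adj : List (List Int)) (lev : Int) (q : List (Option Int) × List Int)
    (w : Int) : List (Option Int) × List Int :=
  if (q.1.getD (pmIdx adj.length w) none).isNone then
    (q.1.set (pmIdx adj.length w) (some (lev + 1)), q.2 ++ [w])
  else q

def GoodB (adj : List (List Int)) (S : Finset Nat) (ℓ : Nat) (N : Finset Nat)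
    (p : List (Option Int) × List Int) : Prop :=
  p.1.length = adj.length ∧
  (p.2.map (pmIdx adj.length)).Nodup ∧
  (p.2.map (pmIdx adj.length)).toFinset = N \ pmReach adj S ℓ ∧
  ∀ v < adj.length, p.1.getD v none =
    if v ∈ (p.2.map (pmIdx adj.length)).toFinset then some ((ℓ : Int) + 1)
    else dvalB adj S ℓ v

def InvB (adj : List (List Int)) (S : Finset Nat) (ℓ : Nat) (d : List (Option Int))
    (front : List Int) : Prop :=
  d.length = adj.length ∧
  (front.map (pmIdx adj.length)).Nodup ∧
  (front.map (pmIdx adj.length)).toFinset = pmLevel adj S ℓ ∧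
  ∀ v < adj.length, d.getD v none = dvalB adj S ℓ v

theorem stepB_fold_good (adj : List (List Int))
    (hA : ∀ row ∈ adj, ∀ w ∈ row, -(adj.length : Int) ≤ w ∧ w < (adj.length : Int))
    (S : Finset Nat) (hS : S ⊆ Finset.range adj.length) (ℓ : Nat) :
    ∀ (ws : List Int), (∀ w ∈ ws, -(adj.length : Int) ≤ w ∧ w < (adj.length : Int)) →
    ∀ (N : Finset Nat) (p : List (Option Int) × List Int), GoodB adj S ℓ N p →
    GoodB adj S ℓ (N ∪ (ws.map (pmIdx adj.length)).toFinset)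
      (ws.foldl (stepB adj (ℓ : Int)) p) := by
  intro ws
  induction ws with
  | nil =>
    intro _ N p hg
    simpa using hg
  | cons w ws ih =>
    intro hws N p hg
    have hw := hws w (by simp)
    have hws' : ∀ w' ∈ ws, -(adj.length : Int) ≤ w' ∧ w' < (adj.length : Int) := by
      intro w' hw'
      exact hws w' (List.mem_cons_of_mem _ hw')
    have hwlt : pmIdx adj.length w < adj.length := pmIdx_lt _ _ hw.1 hw.2
    obtain ⟨hlen, hnd, hset, hval⟩ := hg
    have hsetiff : ∀ x, x ∈ (p.2.map (pmIdx adj.length)).toFinset ↔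
        x ∈ N ∧ x ∉ pmReach adj S ℓ := by
      intro x
      rw [hset]
      simp [Finset.mem_sdiff]
    have hstep : GoodB adj S ℓ (N ∪ {pmIdx adj.length w}) (stepB adj (ℓ : Int) p w) := by
      unfold stepB
      by_cases hacc : pmIdx adj.length w ∈ (p.2.map (pmIdx adj.length)).toFinset
      · rw [if_neg (by
          rw [hval _ hwlt, if_pos hacc]
          simp)]
        refine ⟨hlen, hnd, ?_, ?_⟩
        · rw [hset]
          ext x
          have hmem := (hsetiff _).1 hacc
          simp only [Finset.mem_sdiff, Finset.mem_union, Finset.mem_singleton]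
          constructor
          · rintro ⟨hx, hnx⟩
            exact ⟨Or.inl hx, hnx⟩
          · rintro ⟨hx | rfl, hnx⟩
            · exact ⟨hx, hnx⟩
            · exact ⟨hmem.1, hnx⟩
        · exact hval
      · by_cases hr : pmIdx adj.length w ∈ pmReach adj S ℓ
        · rw [if_neg (by
            rw [hval _ hwlt, if_neg hacc]
            intro habs
            rw [Option.isNone_iff_eq_none] at habs
            rw [dvalB_eq_none_iff adj hA S hS] at habs
            exact habs hr)]
          refine ⟨hlen, hnd, ?_, ?_⟩
          · rw [hset]
            ext x
            simp only [Finset.mem_sdiff, Finset.mem_union, Finset.mem_singleton]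
            constructor
            · rintro ⟨hx, hnx⟩
              exact ⟨Or.inl hx, hnx⟩
            · rintro ⟨hx | rfl, hnx⟩
              · exact ⟨hx, hnx⟩
              · exact absurd hr hnx
          · exact hval
        · rw [if_pos (by
            rw [hval _ hwlt, if_neg hacc, Option.isNone_iff_eq_none]
            rw [dvalB_eq_none_iff adj hA S hS]
            exact hr)]
          have hnotin : pmIdx adj.length w ∉ p.2.map (pmIdx adj.length) := by
            intro habs
            exact hacc (List.mem_toFinset.2 habs)
          refine ⟨by simpa using hlen, ?_, ?_, ?_⟩
          · rw [List.map_append]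
            simp only [List.map_cons, List.map_nil]
            rw [List.nodup_append]
            exact ⟨hnd, List.nodup_singleton _, by simpa using hnotin⟩
          · rw [List.map_append]
            simp only [List.map_cons, List.map_nil]
            ext x
            simp only [List.toFinset_append, Finset.mem_union, List.mem_toFinset,
              List.mem_cons, List.not_mem_nil, or_false, Finset.mem_sdiff,
              Finset.mem_singleton]
            have hx1 := hsetiff x
            rw [List.mem_toFinset] at hx1
            rw [hx1]
            constructor
            · rintro (⟨hx, hnx⟩ | rfl)
              · exact ⟨Or.inl hx, hnx⟩
              · exact ⟨Or.inr rfl, hr⟩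
            · rintro ⟨hx | rfl, hnx⟩
              · exact Or.inl ⟨hx, hnx⟩
              · exact Or.inr rfl
          · intro v hv
            by_cases hvw : v = pmIdx adj.length w
            · subst hvw
              rw [pvGetD_set_self _ _ _ _ (by omega)]
              rw [if_pos (by
                rw [List.map_append]
                simp)]
            · rw [pvGetD_set_ne _ _ _ _ _ (fun h => hvw h.symm), hval _ hv]
              have hmemiff : v ∈ ((p.2 ++ [w]).map (pmIdx adj.length)).toFinset ↔
                  v ∈ (p.2.map (pmIdx adj.length)).toFinset := by
                rw [List.map_append]
                simp only [List.map_cons, List.map_nil, List.toFinset_append,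
                  Finset.mem_union, List.mem_toFinset, List.mem_cons,
                  List.not_mem_nil, or_false]
                constructor
                · rintro (hx | rfl)
                  · exact hx
                  · exact absurd rfl hvw
                · intro hx
                  exact Or.inl hx
              rw [if_congr hmemiff rfl rfl]
    have hfinal := ih hws' (N ∪ {pmIdx adj.length w}) (stepB adj (ℓ : Int) p w) hstep
    rw [List.foldl_cons]
    have hsets : (N ∪ {pmIdx adj.length w}) ∪ (ws.map (pmIdx adj.length)).toFinset =
        N ∪ ((w :: ws).map (pmIdx adj.length)).toFinset := by
      ext x
      simp only [List.map_cons, List.toFinset_cons, Finset.mem_union,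
        Finset.mem_singleton, Finset.mem_insert, List.mem_toFinset]
      tauto
    rwa [hsets] at hfinal

theorem altRound_good (adj : List (List Int))
    (hA : ∀ row ∈ adj, ∀ w ∈ row, -(adj.length : Int) ≤ w ∧ w < (adj.length : Int))
    (S : Finset Nat) (hS : S ⊆ Finset.range adj.length) (ℓ : Nat) (front : List Int) :
    ∀ (N : Finset Nat) (p : List (Option Int) × List Int), GoodB adj S ℓ N p →
    GoodB adj S ℓ (N ∪ ((front.map (pmIdx adj.length)).toFinset).biUnion (pmNbr adj))
      (altRound adj (ℓ : Int) p front) := by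
  induction front with
  | nil =>
    intro N p hg
    simpa [altRound] using hg
  | cons u front ih =>
    intro N p hg
    have hws : ∀ w ∈ adj.getD (pmIdx adj.length u) [],
        -(adj.length : Int) ≤ w ∧ w < (adj.length : Int) := by
      intro w hw
      by_cases hu : pmIdx adj.length u < adj.length
      · have hrow : adj.getD (pmIdx adj.length u) [] ∈ adj := by
          rw [List.getD, List.getElem?_eq_getElem hu]
          exact List.getElem_mem _
        exact hA _ hrow _ hw
      · rw [List.getD, List.getElem?_eq_none (by omega)] at hw
        simp at hw
    have h1 := stepB_fold_good adj hA S hS ℓ _ hws N p hg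
    have h2 := ih _ _ h1
    have hstep : altRound adj (ℓ : Int) p (u :: front) =
        altRound adj (ℓ : Int)
          ((adj.getD (pmIdx adj.length u) []).foldl (stepB adj (ℓ : Int)) p) front := rfl
    rw [hstep]
    have hsets : (N ∪ ((adj.getD (pmIdx adj.length u) []).map (pmIdx adj.length)).toFinset) ∪
        ((front.map (pmIdx adj.length)).toFinset).biUnion (pmNbr adj) =
        N ∪ (((u :: front).map (pmIdx adj.length)).toFinset).biUnion (pmNbr adj) := by
      ext x
      simp only [List.map_cons, List.toFinset_cons, Finset.mem_union,
        Finset.mem_biUnion, Finset.mem_insert, List.mem_toFinset, pmNbr]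
      constructor
      · rintro ((hx | hx) | ⟨a, ha, hx⟩)
        · exact Or.inl hx
        · exact Or.inr ⟨_, Or.inl rfl, hx⟩
        · exact Or.inr ⟨a, Or.inr ha, hx⟩
      · rintro (hx | ⟨a, (rfl | ha), hx⟩)
        · exact Or.inl (Or.inl hx)
        · exact Or.inl (Or.inr hx)
        · exact Or.inr ⟨a, ha, hx⟩
    rwa [hsets] at h2

theorem altRound_inv (adj : List (List Int))
    (hA : ∀ row ∈ adj, ∀ w ∈ row, -(adj.length : Int) ≤ w ∧ w < (adj.length : Int))
    (S : Finset Nat) (hS : S ⊆ Finset.range adj.length) (ℓ : Nat) (d : List (Option Int))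
    (front : List Int) (hinv : InvB adj S ℓ d front) :
    InvB adj S (ℓ + 1) (altRound adj (ℓ : Int) (d, []) front).1
      (altRound adj (ℓ : Int) (d, []) front).2 := by
  obtain ⟨hlen, hnd, hset, hval⟩ := hinv
  have hg0 : GoodB adj S ℓ ∅ (d, []) := by
    refine ⟨hlen, by simp, by simp, ?_⟩
    intro v hv
    simpa using hval v hv
  have hg := altRound_good adj hA S hS ℓ front ∅ (d, []) hg0
  obtain ⟨hlen', hnd', hset', hval'⟩ := hg
  have haccs : (∅ ∪ ((front.map (pmIdx adj.length)).toFinset).biUnion (pmNbr adj)) \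
      pmReach adj S ℓ = pmLevel adj S (ℓ + 1) := by
    rw [hset, pmLevel_succ_eq_sdiff adj hA S hS,
      pmReach_succ_level adj hA S hS ℓ]
    ext x
    simp only [Finset.empty_union, Finset.mem_sdiff, Finset.mem_union]
    tauto
  rw [haccs] at hset'
  refine ⟨hlen', hnd', hset', ?_⟩
  intro v hv
  rw [hval' v hv, hset', dvalB_succ]
  have : v ∈ pmLevel adj S (ℓ + 1) ↔ pmFd adj S v = some (ℓ + 1) := by
    simp only [pmLevel, Finset.mem_filter, Finset.mem_range]
    exact ⟨fun h => h.2, fun h => ⟨hv, h⟩⟩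
  rw [if_congr this rfl rfl]

theorem dvalB_stab (adj : List (List Int))
    (hA : ∀ row ∈ adj, ∀ w ∈ row, -(adj.length : Int) ≤ w ∧ w < (adj.length : Int))
    (S : Finset Nat) (hS : S ⊆ Finset.range adj.length) (ℓ : Nat)
    (hstab : pmReach adj S (ℓ + 1) = pmReach adj S ℓ) (v : Nat) :
    dvalB adj S ℓ v = dvalB adj S adj.length v := by
  rcases h : pmFd adj S v with _ | i
  · simp [dvalB, h]
  · have hmem : v ∈ pmReach adj S i := ((pmFd_eq_some_iff adj hA S hS v i).1 h).1
    have hle : i ≤ ℓ := by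
      rcases Nat.le_total i ℓ with hle | hge
      · exact hle
      · have hri : pmReach adj S i = pmReach adj S ℓ := pmReach_stab adj S hstab hge
        rw [hri] at hmem
        obtain ⟨i', hi', hle'⟩ := (mem_reach_iff_fd_le adj hA S hS v ℓ).1 hmem
        rw [h, Option.some_inj] at hi'
        omega
    have hlen : i ≤ adj.length := pmFd_le_len adj S h
    simp [dvalB, h, hle, hlen]

theorem runB (adj : List (List Int))
    (hA : ∀ row ∈ adj, ∀ w ∈ row, -(adj.length : Int) ≤ w ∧ w < (adj.length : Int))
    (S : Finset Nat) (hS : S ⊆ Finset.range adj.length) :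
    ∀ (fuel ℓ : Nat) (d : List (Option Int)) (front : List Int),
    InvB adj S ℓ d front → front ≠ [] →
    adj.length - (pmReach adj S ℓ).card + 1 ≤ fuel →
    altBfsLoop adj fuel d front (ℓ : Int) = targetB adj S := by
  intro fuel
  induction fuel using Nat.strong_induction_on with
  | _ fuel ih =>
  intro ℓ d front hinv hne hfuel
  rcases fuel with _ | f
  · omega
  rcases front with _ | ⟨u, fs⟩
  · exact absurd rfl hne
  have hinv' := altRound_inv adj hA S hS ℓ d (u :: fs) hinv
  have hunf : altBfsLoop adj (f + 1) d (u :: fs) (ℓ : Int) =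
      altBfsLoop adj f (altRound adj (ℓ : Int) (d, []) (u :: fs)).1
        (altRound adj (ℓ : Int) (d, []) (u :: fs)).2 ((ℓ : Int) + 1) := rfl
  rw [hunf]
  set d' := (altRound adj (ℓ : Int) (d, []) (u :: fs)).1 with hd'
  set new := (altRound adj (ℓ : Int) (d, []) (u :: fs)).2 with hnew'
  have hcast : ((ℓ : Int) + 1) = ((ℓ + 1 : Nat) : Int) := by push_cast; ring
  by_cases hnew : new = []
  · rw [hnew]
    have hfin : ∀ g, altBfsLoop adj g d' [] ((ℓ : Int) + 1) = d' := by
      intro g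
      cases g <;> rfl
    rw [hfin]
    have hlev1 : pmLevel adj S (ℓ + 1) = ∅ := by
      have := hinv'.2.2.1
      rw [hnew] at this
      simpa using this.symm
    have hstab : pmReach adj S (ℓ + 1 + 1) = pmReach adj S (ℓ + 1) := by
      have hsd : pmReach adj S (ℓ + 1) \ pmReach adj S ℓ = ∅ := by
        rw [← pmLevel_succ_eq_sdiff adj hA S hS, hlev1]
      have hsub : pmReach adj S (ℓ + 1) ⊆ pmReach adj S ℓ :=
        Finset.sdiff_eq_empty_iff_subset.1 hsd
      have heq : pmReach adj S (ℓ + 1) = pmReach adj S ℓ :=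
        Finset.Subset.antisymm hsub (pmReach_mono_succ adj S ℓ)
      calc pmReach adj S (ℓ + 2) = pmReach adj S ℓ :=
            pmReach_stab adj S heq (by omega)
        _ = pmReach adj S (ℓ + 1) := heq.symm
    have hlen' : d'.length = adj.length := hinv'.1
    have hval' := hinv'.2.2.2
    apply List.ext_getElem
    · simp [targetB, hlen']
    · intro v hv1 hv2
      have hvn : v < adj.length := by rwa [hlen'] at hv1
      have h1 : d'.getD v none = d'[v] := by
        rw [List.getD, List.getElem?_eq_getElem hv1]
        rfl
      rw [← h1, hval' v hvn, dvalB_stab adj hA S hS (ℓ + 1) hstab v]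
      simp [targetB, hvn]
  · have hnlen : new.length = (pmLevel adj S (ℓ + 1)).card := by
      obtain ⟨-, hnd1, hset1, -⟩ := hinv'
      rw [← hset1, List.toFinset_card_of_nodup hnd1, List.length_map]
    have hpos : 0 < new.length := List.length_pos_of_ne_nil hnew
    have hcard1 : (pmLevel adj S (ℓ + 1)).card + (pmReach adj S ℓ).card =
        (pmReach adj S (ℓ + 1)).card := by
      rw [pmLevel_succ_eq_sdiff adj hA S hS]
      exact Finset.card_sdiff_add_card_eq_card (pmReach_mono_succ adj S ℓ)
    have hcardle : (pmReach adj S (ℓ + 1)).card ≤ adj.length := by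
      have := Finset.card_le_card (pmReach_subset_range adj hA S hS (ℓ + 1))
      simpa using this
    rw [hcast]
    exact ih f (by omega) (ℓ + 1) d' new hinv' hnew (by omega)

theorem altBfs_eq_target (adj : List (List Int))
    (hA : ∀ row ∈ adj, ∀ w ∈ row, -(adj.length : Int) ≤ w ∧ w < (adj.length : Int))
    (s : Nat) (hs : s < adj.length) :
    altBfs adj s = targetB adj {s} := by
  have hS : ({s} : Finset Nat) ⊆ Finset.range adj.length := by
    intro x hx
    simp only [Finset.mem_singleton] at hx
    subst hx
    simpa using hs
  have hinv : InvB adj {s} 0 ((List.replicate adj.length (none : Option Int)).set s (some 0))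
      [(s : Int)] := by
    refine ⟨by simp, ?_, ?_, ?_⟩
    · simp
    · simp only [List.map_cons, List.map_nil, pmIdx_natCast]
      rw [pmLevel_zero adj hA {s} hS]
      simp
    · intro v hv
      have hdv : dvalB adj {s} 0 v = if v ∈ ({s} : Finset Nat) then some 0 else none := by
        rcases h : pmFd adj {s} v with _ | i
        · have hnot : v ∉ ({s} : Finset Nat) :=
            ((pmFd_eq_none_iff adj hA {s} hS v).1 h) 0
          simp [dvalB, h, hnot]
        · by_cases hi : i = 0
          · subst hi
            have : v ∈ ({s} : Finset Nat) := (pmFd_zero_iff adj hA {s} hS v).1 h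
            simp [dvalB, h, this]
          · have hnot : v ∉ ({s} : Finset Nat) := by
              intro hmem
              have := (pmFd_zero_iff adj hA {s} hS v).2 hmem
              rw [h, Option.some_inj] at this
              omega
            simp [dvalB, h, hi, hnot]
      rw [hdv]
      by_cases hvs : v = s
      · subst hvs
        rw [pvGetD_set_self _ _ _ _ (by simpa using hs)]
        simp
      · rw [pvGetD_set_ne _ _ _ _ _ (fun h => hvs h.symm)]
        simp [List.getD, List.getElem?_replicate, hv, hvs]
  have hrun := runB adj hA {s} hS adj.length 0
    ((List.replicate adj.length (none : Option Int)).set s (some 0)) [(s : Int)]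
    hinv (by simp) (by
      have h0 : pmReach adj {s} 0 = {s} := rfl
      rw [h0, Finset.card_singleton]
      omega)
  unfold altBfs
  simpa using hrun

-- ---------- first-distance of a union is the min ----------

def ominN : Option Nat → Option Nat → Option Nat
  | none, b => b
  | some a, none => some a
  | some a, some b => some (Nat.min a b)

theorem pmFd_union (adj : List (List Int))
    (hA : ∀ row ∈ adj, ∀ w ∈ row, -(adj.length : Int) ≤ w ∧ w < (adj.length : Int))
    (S T : Finset Nat) (hS : S ⊆ Finset.range adj.length)
    (hT : T ⊆ Finset.range adj.length) (v : Nat) :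
    pmFd adj (S ∪ T) v = ominN (pmFd adj S v) (pmFd adj T v) := by
  have hST : S ∪ T ⊆ Finset.range adj.length := Finset.union_subset hS hT
  rcases hfs : pmFd adj S v with _ | a <;> rcases hft : pmFd adj T v with _ | b
  · show pmFd adj (S ∪ T) v = none
    rw [pmFd_eq_none_iff adj hA _ hST]
    intro j hj
    rw [pmReach_union] at hj
    rcases Finset.mem_union.1 hj with hj | hj
    · exact ((pmFd_eq_none_iff adj hA S hS v).1 hfs) j hj
    · exact ((pmFd_eq_none_iff adj hA T hT v).1 hft) j hj
  · show pmFd adj (S ∪ T) v = some b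
    rw [pmFd_eq_some_iff adj hA _ hST]
    obtain ⟨hmem, hmin⟩ := (pmFd_eq_some_iff adj hA T hT v b).1 hft
    constructor
    · rw [pmReach_union]
      exact Finset.mem_union_right _ hmem
    · intro j hj hcon
      rw [pmReach_union] at hcon
      rcases Finset.mem_union.1 hcon with hc | hc
      · exact ((pmFd_eq_none_iff adj hA S hS v).1 hfs) j hc
      · exact hmin j hj hc
  · show pmFd adj (S ∪ T) v = some a
    rw [pmFd_eq_some_iff adj hA _ hST]
    obtain ⟨hmem, hmin⟩ := (pmFd_eq_some_iff adj hA S hS v a).1 hfs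
    constructor
    · rw [pmReach_union]
      exact Finset.mem_union_left _ hmem
    · intro j hj hcon
      rw [pmReach_union] at hcon
      rcases Finset.mem_union.1 hcon with hc | hc
      · exact hmin j hj hc
      · exact ((pmFd_eq_none_iff adj hA T hT v).1 hft) j hc
  · show pmFd adj (S ∪ T) v = some (Nat.min a b)
    rw [pmFd_eq_some_iff adj hA _ hST]
    obtain ⟨hmemS, hminS⟩ := (pmFd_eq_some_iff adj hA S hS v a).1 hfs
    obtain ⟨hmemT, hminT⟩ := (pmFd_eq_some_iff adj hA T hT v b).1 hft
    constructor
    · rw [pmReach_union]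
      rcases Nat.le_total a b with hab | hab
      · have hm : Nat.min a b = a := min_eq_left hab
        rw [hm]
        exact Finset.mem_union_left _ hmemS
      · have hm : Nat.min a b = b := min_eq_right hab
        rw [hm]
        exact Finset.mem_union_right _ hmemT
    · intro j hj hcon
      rw [pmReach_union] at hcon
      rcases Finset.mem_union.1 hcon with hc | hc
      · exact hminS j (lt_of_lt_of_le hj (Nat.min_le_left a b)) hc
      · exact hminT j (lt_of_lt_of_le hj (Nat.min_le_right a b)) hc

theorem pmFd_empty (adj : List (List Int)) (v : Nat) : pmFd adj ∅ v = none := by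
  unfold pmFd
  rw [dif_neg]
  rintro ⟨i, -, hi⟩
  rw [pmReach_empty] at hi
  simp at hi

-- ---------- assembling the two solvers ----------

theorem pyCombinations_sublist {k : Nat} {l c : List Nat}
    (h : c ∈ pyCombinations k l) : c.Sublist l := by
  induction l generalizing k c with
  | nil =>
    rcases k with _ | k
    · simp only [pyCombinations, List.mem_singleton] at h
      subst h
      exact List.Sublist.refl []
    · simp [pyCombinations] at h
  | cons x xs ih =>
    rcases k with _ | k
    · simp only [pyCombinations, List.mem_singleton] at h
      subst h
      exact List.nil_sublist _
    · simp only [pyCombinations, List.mem_append, List.mem_map] at h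
      rcases h with ⟨c', hc', rfl⟩ | h
      · exact List.Sublist.cons₂ x (ih hc')
      · exact List.Sublist.cons x (ih h)

theorem pyCombinations_eq_nil : ∀ {k : Nat} {l : List Nat}, l.length < k →
    pyCombinations k l = []
  | 0, l, h => absurd h (by omega)
  | k + 1, [], _ => rfl
  | k + 1, x :: xs, h => by
    show (pyCombinations k xs).map (x :: ·) ++ pyCombinations (k + 1) xs = []
    rw [pyCombinations_eq_nil (by simpa using Nat.lt_of_succ_lt_succ h),
      pyCombinations_eq_nil (l := xs) (by simp at h; omega)]
    rfl

theorem pyCombinations_length {k : Nat} {l c : List Nat}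
    (h : c ∈ pyCombinations k l) : c.length = k := by
  induction l generalizing k c with
  | nil =>
    rcases k with _ | k
    · simp only [pyCombinations, List.mem_singleton] at h
      subst h
      rfl
    · simp [pyCombinations] at h
  | cons x xs ih =>
    rcases k with _ | k
    · simp only [pyCombinations, List.mem_singleton] at h
      subst h
      rfl
    · simp only [pyCombinations, List.mem_append, List.mem_map] at h
      rcases h with ⟨c', hc', rfl⟩ | h
      · simp [ih hc']
      · exact ih h

theorem cfg_getD (l : List Nat) : ∀ (c : List Int) (v : Nat), v < c.length →
    (l.foldl (fun c v => c.set v 1) c).getD v 0 = if v ∈ l then 1 else c.getD v 0 := by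
  induction l with
  | nil => simp
  | cons u l ih =>
    intro c v hv
    rw [List.foldl_cons, ih _ v (by simpa using hv)]
    by_cases hvu : v = u
    · subst hvu
      rw [pvGetD_set_self _ _ _ _ hv]
      simp
    · rw [pvGetD_set_ne _ _ _ _ _ (fun h => hvu h.symm)]
      simp [List.mem_cons, hvu]

theorem cfg_length (l : List Nat) : ∀ (c : List Int),
    (l.foldl (fun c v => c.set v 1) c).length = c.length := by
  induction l with
  | nil => simp
  | cons u l ih =>
    intro c
    rw [List.foldl_cons, ih]
    simp

theorem cfg_eq_map (adj : List (List Int)) (chosen : List Nat) :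
    chosen.foldl (fun c v => c.set v 1) (List.replicate adj.length (0 : Int)) =
      (List.range adj.length).map (fun v => if v ∈ chosen then (1 : Int) else 0) := by
  apply List.ext_getElem
  · simp [cfg_length]
  · intro v hv1 hv2
    have hvn : v < adj.length := by
      simpa [cfg_length] using hv1
    have h1 : (chosen.foldl (fun c v => c.set v 1)
        (List.replicate adj.length (0 : Int))).getD v 0 = _ :=
      cfg_getD chosen (List.replicate adj.length (0 : Int)) v (by simpa using hvn)
    rw [List.getD, List.getElem?_eq_getElem hv1] at h1
    simp only [Option.getD_some] at h1
    rw [h1]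
    simp [List.getD, List.getElem?_replicate, hvn]

theorem foldl_add_int (l : List Int) : ∀ (t : Int), l.foldl (· + ·) t = t + l.foldl (· + ·) 0 := by
  induction l with
  | nil => simp
  | cons x l ih =>
    intro t
    simp only [List.foldl_cons]
    rw [ih (t + x), ih (0 + x)]
    ring

theorem cfg_sum (adj : List (List Int)) (chosen : List Nat)
    (hnd : chosen.Nodup) (hsub : ∀ v ∈ chosen, v < adj.length) :
    ((List.range adj.length).map
        (fun v => if v ∈ chosen then (1 : Int) else 0)).foldl (· + ·) 0 =
      (chosen.length : Int) := by
  have haux : ∀ (L : List Nat),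
      (L.map (fun v => if v ∈ chosen then (1 : Int) else 0)).foldl (· + ·) 0 =
        ((L.filter (fun v => decide (v ∈ chosen))).length : Int) := by
    intro L
    induction L with
    | nil => simp
    | cons x L ih =>
      simp only [List.map_cons, List.foldl_cons]
      rw [foldl_add_int, ih]
      by_cases hx : x ∈ chosen
      · simp [hx, List.filter_cons]
        push_cast
        ring
      · simp [hx, List.filter_cons]
  rw [haux]
  congr 1
  have h1 : ((List.range adj.length).filter (fun v => decide (v ∈ chosen))).Nodup :=
    (List.nodup_range).filter _
  have h2 : ((List.range adj.length).filter (fun v => decide (v ∈ chosen))).toFinset =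
      chosen.toFinset := by
    ext x
    simp only [List.mem_toFinset, List.mem_filter, List.mem_range, decide_eq_true_eq]
    exact ⟨fun h => h.2, fun h => ⟨hsub x h, h⟩⟩
  rw [← List.toFinset_card_of_nodup h1, h2, List.toFinset_card_of_nodup hnd]

theorem init_fold (adj : List (List Int)) (cfg : List Int) :
    (List.range adj.length).foldl
        (fun (p : List Int × List Int) v =>
          if cfg.getD v 0 = 1 then (p.1.set v 0, p.2 ++ [(v : Int)]) else p)
        (List.replicate adj.length (-1), []) =
      ((List.range adj.length).map (fun v => if cfg.getD v 0 = 1 then (0 : Int) else -1),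
       ((List.range adj.length).filter (fun v => cfg.getD v 0 = 1)).map
         (fun (v : Nat) => (v : Int))) := by
  have haux : ∀ (L : List Nat) (c acc : List Int),
      L.foldl (fun (p : List Int × List Int) v =>
          if cfg.getD v 0 = 1 then (p.1.set v 0, p.2 ++ [(v : Int)]) else p) (c, acc) =
        (L.foldl (fun c v => if cfg.getD v 0 = 1 then c.set v 0 else c) c,
         acc ++ (L.filter (fun v => cfg.getD v 0 = 1)).map (fun (v : Nat) => (v : Int))) := by
    intro L
    induction L with
    | nil => simp
    | cons u L ih =>
      intro c acc
      rw [List.foldl_cons, List.foldl_cons]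
      by_cases hc : cfg.getD u 0 = 1
      · rw [if_pos hc, if_pos hc, ih, List.filter_cons_of_pos (by simpa using hc),
          List.map_cons, List.append_cons]
        simp
      · rw [if_neg hc, if_neg hc, ih, List.filter_cons_of_neg (by simpa using hc)]
  have hlen : ∀ (L : List Nat) (c : List Int),
      (L.foldl (fun c v => if cfg.getD v 0 = 1 then c.set v 0 else c) c).length =
        c.length := by
    intro L
    induction L with
    | nil => simp
    | cons u L ih =>
      intro c
      rw [List.foldl_cons]
      by_cases hc : cfg.getD u 0 = 1
      · rw [if_pos hc, ih]
        simp
      · rw [if_neg hc, ih]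
  have hfst : ∀ (L : List Nat) (c : List Int) (v : Nat), v < c.length →
      (L.foldl (fun c v => if cfg.getD v 0 = 1 then c.set v 0 else c) c).getD v 0 =
        if v ∈ L ∧ cfg.getD v 0 = 1 then 0 else c.getD v 0 := by
    intro L
    induction L with
    | nil => simp
    | cons u L ih =>
      intro c v hv
      rw [List.foldl_cons]
      by_cases hc : cfg.getD u 0 = 1
      · rw [if_pos hc, ih _ v (by simpa using hv)]
        by_cases hvu : v = u
        · subst hvu
          rw [pvGetD_set_self _ _ _ _ hv, ite_self,
            if_pos ⟨(by simp : v ∈ v :: L), hc⟩]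
        · rw [pvGetD_set_ne _ _ _ _ _ (fun h => hvu h.symm)]
          have hiff : (v ∈ L ∧ cfg.getD v 0 = 1) ↔
              (v ∈ u :: L ∧ cfg.getD v 0 = 1) := by
            constructor
            · rintro ⟨h1, h2⟩
              exact ⟨List.mem_cons_of_mem _ h1, h2⟩
            · rintro ⟨h1, h2⟩
              rcases List.mem_cons.1 h1 with rfl | h1
              · exact absurd rfl hvu
              · exact ⟨h1, h2⟩
          rw [if_congr hiff rfl rfl]
      · rw [if_neg hc, ih _ v hv]
        have hiff : (v ∈ L ∧ cfg.getD v 0 = 1) ↔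
            (v ∈ u :: L ∧ cfg.getD v 0 = 1) := by
          constructor
          · rintro ⟨h1, h2⟩
            exact ⟨List.mem_cons_of_mem _ h1, h2⟩
          · rintro ⟨h1, h2⟩
            rcases List.mem_cons.1 h1 with rfl | h1
            · exact absurd h2 hc
            · exact ⟨h1, h2⟩
        rw [if_congr hiff rfl rfl]
  rw [haux]
  refine Prod.ext ?_ (by simp)
  show _ = (List.range adj.length).map fun v => if cfg.getD v 0 = 1 then (0 : Int) else -1
  apply List.ext_getElem
  · rw [hlen]
    simp
  · intro v hv1 hv2
    have hvn : v < adj.length := by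
      rw [hlen] at hv1
      simpa using hv1
    have h1 := hfst (List.range adj.length) (List.replicate adj.length (-1)) v
      (by simpa using hvn)
    rw [List.getD, List.getElem?_eq_getElem hv1] at h1
    simp only [Option.getD_some] at h1
    rw [h1]
    simp [List.getD, List.getElem?_replicate, hvn, List.mem_range]

theorem adv_bfs_eq_target (adj : List (List Int))
    (hA : ∀ row ∈ adj, ∀ w ∈ row, -(adj.length : Int) ≤ w ∧ w < (adj.length : Int))
    (chosen : List Nat) (hnd : chosen.Nodup) (hsub : ∀ v ∈ chosen, v < adj.length) :
    adv_bfs_distances adj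
        ((List.range adj.length).map (fun v => if v ∈ chosen then (1 : Int) else 0)) =
      (if (targetA adj chosen.toFinset).any (fun d => d == -1) then none
       else some (targetA adj chosen.toFinset)) := by
  have hS : chosen.toFinset ⊆ Finset.range adj.length := by
    intro x hx
    simp only [List.mem_toFinset] at hx
    simpa using hsub x hx
  have hcfgv : ∀ v < adj.length,
      (((List.range adj.length).map
        (fun v => if v ∈ chosen then (1 : Int) else 0)).getD v 0 = 1 ↔ v ∈ chosen) := by
    intro v hv
    have he := pvGetD_map_range (fun v => if v ∈ chosen then (1 : Int) else 0)
      adj.length v 0 hv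
    rw [he]
    by_cases hm : v ∈ chosen <;> simp [hm]
  have hfilt : (List.range adj.length).filter
      (fun v => ((List.range adj.length).map
        (fun v => if v ∈ chosen then (1 : Int) else 0)).getD v 0 = 1) =
      (List.range adj.length).filter (fun v => decide (v ∈ chosen)) := by
    apply List.filter_congr
    intro v hv
    simp only [List.mem_range] at hv
    rw [decide_eq_decide]
    exact hcfgv v hv
  have hdval0 : ∀ v < adj.length, dvalA adj chosen.toFinset 0 v =
      if v ∈ chosen then 0 else -1 := by
    intro v hv
    rcases h : pmFd adj chosen.toFinset v with _ | i
    · have hnot : v ∉ chosen.toFinset :=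
        ((pmFd_eq_none_iff adj hA _ hS v).1 h) 0
      rw [List.mem_toFinset] at hnot
      simp [dvalA, h, hnot]
    · by_cases hi : i = 0
      · subst hi
        have hmem : v ∈ chosen.toFinset := (pmFd_zero_iff adj hA _ hS v).1 h
        rw [List.mem_toFinset] at hmem
        simp [dvalA, h, hmem]
      · have hnot : v ∉ chosen.toFinset := by
          intro hmem
          have := (pmFd_zero_iff adj hA _ hS v).2 hmem
          rw [h, Option.some_inj] at this
          omega
        rw [List.mem_toFinset] at hnot
        simp [dvalA, h, hi, hnot]
  have hmain : advBfsLoopA adj adj.length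
      ((List.range adj.length).map (fun v =>
        if ((List.range adj.length).map
          (fun v => if v ∈ chosen then (1 : Int) else 0)).getD v 0 = 1 then (0 : Int)
        else -1))
      (((List.range adj.length).filter
        (fun v => ((List.range adj.length).map
          (fun v => if v ∈ chosen then (1 : Int) else 0)).getD v 0 = 1)).map
        (fun (v : Nat) => (v : Int))) = targetA adj chosen.toFinset := by
    rcases hch : chosen with _ | ⟨c0, crest⟩
    · subst hch
      have hq : (List.range adj.length).filter
          (fun v => ((List.range adj.length).map
            (fun v => if v ∈ ([] : List Nat) then (1 : Int) else 0)).getD v 0 = 1) = [] := by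
        rw [hfilt]
        simp
      rw [hq]
      simp only [List.map_nil]
      rw [advBfsLoopA_nil]
      apply List.ext_getElem
      · simp [targetA]
      · intro v hv1 hv2
        have hvn : v < adj.length := by simpa using hv1
        have he1 : (((List.range adj.length).map (fun v =>
            if ((List.range adj.length).map
              (fun v => if v ∈ ([] : List Nat) then (1 : Int) else 0)).getD v 0 = 1
            then (0 : Int) else -1))).getD v 0 =
            if ((List.range adj.length).map
              (fun v => if v ∈ ([] : List Nat) then (1 : Int) else 0)).getD v 0 = 1
            then (0 : Int) else -1 := pvGetD_map_range _ _ _ _ hvn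
        rw [List.getD, List.getElem?_eq_getElem hv1] at he1
        simp only [Option.getD_some] at he1
        rw [he1, if_neg (by
          rw [hcfgv v hvn]
          simp)]
        simp [targetA, dvalA, pmFd_empty]
    · rw [← hch]
      have hinv : InvA adj chosen.toFinset 0
          ((List.range adj.length).map (fun v =>
            if ((List.range adj.length).map
              (fun v => if v ∈ chosen then (1 : Int) else 0)).getD v 0 = 1 then (0 : Int)
            else -1))
          (((List.range adj.length).filter
            (fun v => ((List.range adj.length).map
              (fun v => if v ∈ chosen then (1 : Int) else 0)).getD v 0 = 1)).map
            (fun (v : Nat) => (v : Int))) := by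
        refine ⟨by simp, ?_, ?_, ?_⟩
        · rw [hfilt, List.map_map]
          rw [List.map_congr_left (g := id) (fun v hv => by
            have hvlt : v < adj.length := by
              have := List.mem_of_mem_filter hv
              simpa using this
            show pmIdx adj.length ((v : Nat) : Int) = id v
            rw [pmIdx_natCast]
            rfl)]
          simp only [List.map_id]
          exact List.nodup_range.filter _
        · rw [hfilt, List.map_map]
          rw [List.map_congr_left (g := id) (fun v hv => by
            show pmIdx adj.length ((v : Nat) : Int) = id v
            rw [pmIdx_natCast]
            rfl)]
          simp only [List.map_id]
          rw [pmLevel_zero adj hA _ hS]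
          ext x
          simp only [List.mem_toFinset, List.mem_filter, List.mem_range,
            decide_eq_true_eq]
          exact ⟨fun h => h.2, fun h => ⟨hsub x h, h⟩⟩
        · intro v hv
          rw [pvGetD_map_range _ _ _ _ hv, hdval0 v hv]
          rw [if_congr (hcfgv v hv) rfl rfl]
      have hfne : (((List.range adj.length).filter
          (fun v => ((List.range adj.length).map
            (fun v => if v ∈ chosen then (1 : Int) else 0)).getD v 0 = 1)).map
          (fun (v : Nat) => (v : Int))) ≠ [] := by
        rw [hfilt]
        intro habs
        have hc0 : c0 ∈ (List.range adj.length).filter (fun v => decide (v ∈ chosen)) := by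
          simp only [List.mem_filter, List.mem_range, decide_eq_true_eq]
          constructor
          · have : c0 ∈ chosen := by rw [hch]; simp
            exact hsub c0 this
          · rw [hch]; simp
        rw [List.map_eq_nil_iff.1 habs] at hc0
        simp at hc0
      have hflen : (((List.range adj.length).filter
          (fun v => ((List.range adj.length).map
            (fun v => if v ∈ chosen then (1 : Int) else 0)).getD v 0 = 1)).map
          (fun (v : Nat) => (v : Int))).length =
          (pmLevel adj chosen.toFinset 0).card :=
        invA_front_length adj chosen.toFinset 0 _ _ hinv
      have hcard0 : (pmLevel adj chosen.toFinset 0).card =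
          (pmReach adj chosen.toFinset 0).card := by
        rw [pmLevel_zero adj hA _ hS]
        rfl
      have hcardle : (pmReach adj chosen.toFinset 0).card ≤ adj.length := by
        have := Finset.card_le_card (pmReach_subset_range adj hA _ hS 0)
        simpa using this
      exact runA adj hA chosen.toFinset hS adj.length 0 _ _ hinv hfne (by omega)
  unfold adv_bfs_distances
  simp only [init_fold]
  rw [hmain]

theorem targetA_any_iff (adj : List (List Int))
    (hA : ∀ row ∈ adj, ∀ w ∈ row, -(adj.length : Int) ≤ w ∧ w < (adj.length : Int))
    (S : Finset Nat) (hS : S ⊆ Finset.range adj.length) :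
    (targetA adj S).any (fun d => d == -1) = true ↔
      ∃ v < adj.length, pmFd adj S v = none := by
  rw [List.any_eq_true]
  constructor
  · rintro ⟨x, hx, hbeq⟩
    simp only [targetA, List.mem_map, List.mem_range] at hx
    obtain ⟨v, hv, rfl⟩ := hx
    refine ⟨v, hv, ?_⟩
    rcases h : pmFd adj S v with _ | i
    · rfl
    · exfalso
      have hle : i ≤ adj.length := pmFd_le_len adj S h
      simp only [dvalA, h, if_pos hle, beq_iff_eq] at hbeq
      omega
  · rintro ⟨v, hv, h⟩
    refine ⟨dvalA adj S adj.length v, ?_, ?_⟩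
    · simp only [targetA, List.mem_map, List.mem_range]
      exact ⟨v, hv, rfl⟩
    · simp [dvalA, h]

theorem altMin_eq_fd (adj : List (List Int))
    (hA : ∀ row ∈ adj, ∀ w ∈ row, -(adj.length : Int) ≤ w ∧ w < (adj.length : Int))
    (chosen : List Nat) (hsub : ∀ v ∈ chosen, v < adj.length) (v : Nat)
    (hv : v < adj.length) :
    altMin ((List.range adj.length).map (altBfs adj)) chosen v =
      (pmFd adj chosen.toFinset v).map (fun (i : Nat) => (i : Int)) := by
  have hg : ∀ c ∈ chosen,
      ((((List.range adj.length).map (altBfs adj)).getD c []).getD v none) =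
        (pmFd adj {c} v).map (fun (i : Nat) => (i : Int)) := by
    intro c hc
    have hcn : c < adj.length := hsub c hc
    rw [pvGetD_map_range _ _ _ _ hcn, altBfs_eq_target adj hA c hcn]
    unfold targetB
    rw [pvGetD_map_range _ _ _ _ hv]
    rcases h : pmFd adj {c} v with _ | i
    · simp [dvalB, h]
    · simp [dvalB, h, pmFd_le_len adj _ h]
  have haux : ∀ (cs : List Nat), (∀ c ∈ cs, c ∈ chosen) →
      ∀ (S0 : Finset Nat), S0 ⊆ Finset.range adj.length →
      ∀ (m : Option Int), m = (pmFd adj S0 v).map (fun (i : Nat) => (i : Int)) →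
      cs.foldl (fun m c =>
        match (((List.range adj.length).map (altBfs adj)).getD c []).getD v none with
        | none => m
        | some d =>
          match m with
          | none => some d
          | some mv => if d < mv then some d else m) m =
        (pmFd adj (S0 ∪ cs.toFinset) v).map (fun (i : Nat) => (i : Int)) := by
    intro cs
    induction cs with
    | nil =>
      intro _ S0 _ m hm
      simpa using hm
    | cons c cs ih =>
      intro hcs S0 hS0 m hm
      subst hm
      have hc : c ∈ chosen := hcs c (by simp)
      have hcn : c < adj.length := hsub c hc
      have hsc : ({c} : Finset Nat) ⊆ Finset.range adj.length := by
        intro x hx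
        simp only [Finset.mem_singleton] at hx
        subst hx
        simpa using hcn
      have hunion := pmFd_union adj hA S0 {c} hS0 hsc v
      have hsets : (S0 ∪ {c}) ∪ cs.toFinset = S0 ∪ (c :: cs).toFinset := by
        ext x
        simp only [Finset.mem_union, Finset.mem_singleton, List.toFinset_cons,
          Finset.mem_insert, List.mem_toFinset]
        tauto
      rw [List.foldl_cons, hg c hc]
      have hnext : (match (pmFd adj {c} v).map (fun (i : Nat) => (i : Int)) with
          | none => (pmFd adj S0 v).map (fun (i : Nat) => (i : Int))
          | some d =>
            match (pmFd adj S0 v).map (fun (i : Nat) => (i : Int)) with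
            | none => some d
            | some mv => if d < mv then some d else
                (pmFd adj S0 v).map (fun (i : Nat) => (i : Int))) =
          (pmFd adj (S0 ∪ {c}) v).map (fun (i : Nat) => (i : Int)) := by
        rw [hunion]
        rcases hfc : pmFd adj {c} v with _ | b <;> rcases hfs : pmFd adj S0 v with _ | a
        · rfl
        · rfl
        · rfl
        · show (if (b : Int) < (a : Int) then some ((b : Nat) : Int) else some ((a : Nat) : Int)) =
            some ((Nat.min a b : Nat) : Int)
          by_cases hba : b < a
          · rw [if_pos (by exact_mod_cast hba)]
            have hm2 : Nat.min a b = b := min_eq_right (le_of_lt hba)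
            rw [hm2]
          · rw [if_neg (by
              intro habs
              exact hba (by exact_mod_cast habs))]
            have hm2 : Nat.min a b = a := min_eq_left (by omega)
            rw [hm2]
      rw [hnext]
      rw [ih (fun c' hc' => hcs c' (by simp [hc'])) (S0 ∪ {c})
        (Finset.union_subset hS0 hsc) _ rfl, hsets]
  have hfin := haux chosen (fun c hc => hc) ∅ (Finset.empty_subset _) none
    (by rw [pmFd_empty]; rfl)
  rw [Finset.empty_union] at hfin
  exact hfin

theorem altTotalLoop_spec (table : List (List (Option Int))) (chosen : List Nat)
    (g : Nat → Option Int) :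
    ∀ (vs : List Nat) (t : Int), (∀ v ∈ vs, altMin table chosen v = g v) →
    altTotalLoop table chosen vs t =
      (if ∀ v ∈ vs, g v ≠ none then
        some (t + (vs.map (fun v => (g v).getD 0)).foldl (· + ·) 0)
      else none) := by
  intro vs
  induction vs with
  | nil =>
    intro t _
    show some t = _
    simp
  | cons v vs ih =>
    intro t hg
    show (match altMin table chosen v with
      | none => none
      | some m => altTotalLoop table chosen vs (t + m)) = _
    rw [hg v (by simp)]
    rcases hgv : g v with _ | m
    · rw [if_neg (by
        intro hall
        exact (hall v (by simp)) hgv)]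
    · change altTotalLoop table chosen vs (t + m) = _
      rw [ih (t + m) (fun v' hv' => hg v' (by simp [hv']))]
      by_cases hall : ∀ v' ∈ vs, g v' ≠ none
      · rw [if_pos hall, if_pos (by
          intro v' hv'
          rcases List.mem_cons.1 hv' with rfl | hv'
          · rw [hgv]
            simp
          · exact hall v' hv')]
        congr 1
        rw [List.map_cons, List.foldl_cons, hgv]
        simp only [Option.getD_some]
        rw [foldl_add_int _ (0 + m)]
        ring
      · rw [if_neg hall, if_neg (by
          intro hall'
          exact hall (fun v' hv' => hall' v' (List.mem_cons_of_mem _ hv')))]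

theorem per_chosen (adj : List (List Int)) (k : Int)
    (hA : ∀ row ∈ adj, ∀ w ∈ row, -(adj.length : Int) ≤ w ∧ w < (adj.length : Int))
    (hk : 0 ≤ k) (chosen : List Nat) (hnd : chosen.Nodup)
    (hsub : ∀ v ∈ chosen, v < adj.length) (hlen : chosen.length = k.toNat) :
    (adv_is_feasible_pmedian adj
        (chosen.foldl (fun c v => c.set v 1) (List.replicate adj.length (0 : Int))) k) =
      (match altTotalLoop ((List.range adj.length).map (altBfs adj)) chosen
          (List.range adj.length) 0 with
       | none => false
       | some total => decide (total ≤ (adj.length : Int) - k)) := by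
  have hS : chosen.toFinset ⊆ Finset.range adj.length := by
    intro x hx
    simp only [List.mem_toFinset] at hx
    simpa using hsub x hx
  have hgdef : ∀ v ∈ List.range adj.length,
      altMin ((List.range adj.length).map (altBfs adj)) chosen v =
        (pmFd adj chosen.toFinset v).map (fun (i : Nat) => (i : Int)) := by
    intro v hv
    exact altMin_eq_fd adj hA chosen hsub v (by simpa using hv)
  rw [cfg_eq_map adj chosen]
  rw [altTotalLoop_spec _ chosen _ (List.range adj.length) 0 hgdef]
  unfold adv_is_feasible_pmedian adv_total_distance
  rw [adv_bfs_eq_target adj hA chosen hnd hsub]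
  have hsum := cfg_sum adj chosen hnd hsub
  have hkk : (chosen.length : Int) = k := by
    rw [hlen]
    exact_mod_cast Int.toNat_of_nonneg hk
  rw [if_neg (by
    rw [hsum, hkk]
    exact fun h => h rfl)]
  by_cases hany : ∃ v < adj.length, pmFd adj chosen.toFinset v = none
  · rw [if_pos ((targetA_any_iff adj hA _ hS).2 hany)]
    rw [if_neg (by
      obtain ⟨v, hv, hfd⟩ := hany
      intro hall
      exact (hall v (by simpa using hv)) (by rw [hfd]; rfl))]
  · rw [if_neg (by
      rw [targetA_any_iff adj hA _ hS]
      exact hany)]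
    have hall : ∀ v ∈ List.range adj.length,
        (pmFd adj chosen.toFinset v).map (fun (i : Nat) => (i : Int)) ≠ none := by
      intro v hv habs
      rcases h : pmFd adj chosen.toFinset v with _ | i
      · exact hany ⟨v, by simpa using hv, h⟩
      · rw [h] at habs
        simp at habs
    rw [if_pos hall]
    have hteq : (targetA adj chosen.toFinset).foldl (· + ·) 0 =
        0 + ((List.range adj.length).map
          (fun v => ((pmFd adj chosen.toFinset v).map (fun (i : Nat) => (i : Int))).getD 0)).foldl
          (· + ·) 0 := by
      rw [zero_add]
      unfold targetA
      congr 1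
      apply List.map_congr_left
      intro v hv
      rcases h : pmFd adj chosen.toFinset v with _ | i
      · exact absurd h (by
          intro h'
          exact hany ⟨v, by simpa using hv, h'⟩)
      · simp [dvalA, h, pmFd_le_len adj _ h]
    exact congrArg (fun t : Int => decide (t ≤ (adj.length : Int) - k)) hteq

theorem solve_loop_eq (adj : List (List Int)) (k : Int)
    (hA : ∀ row ∈ adj, ∀ w ∈ row, -(adj.length : Int) ≤ w ∧ w < (adj.length : Int))
    (hk : 0 ≤ k) :
    ∀ (L : List (List Nat)),
    (∀ c ∈ L, c.Nodup ∧ (∀ v ∈ c, v < adj.length) ∧ c.length = k.toNat) →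
    advSolveLoop adj k L =
      altSolveLoop adj ((List.range adj.length).map (altBfs adj)) k L := by
  intro L
  induction L with
  | nil =>
    intro _
    rfl
  | cons chosen rest ih =>
    intro hprops
    obtain ⟨hnd, hsub, hlenc⟩ := hprops chosen (by simp)
    have hpc := per_chosen adj k hA hk chosen hnd hsub hlenc
    have hrest := ih (fun c hc => hprops c (by simp [hc]))
    show (if adv_is_feasible_pmedian adj
        (chosen.foldl (fun c v => c.set v 1) (List.replicate adj.length (0 : Int))) k
      then some (chosen.foldl (fun c v => c.set v 1) (List.replicate adj.length (0 : Int)))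
      else advSolveLoop adj k rest) = _
    rcases htl : altTotalLoop ((List.range adj.length).map (altBfs adj)) chosen
        (List.range adj.length) 0 with _ | total
    · rw [htl] at hpc
      have hf : adv_is_feasible_pmedian adj
          (chosen.foldl (fun c v => c.set v 1) (List.replicate adj.length (0 : Int))) k =
          false := hpc
      rw [hf]
      have hunf2 : altSolveLoop adj ((List.range adj.length).map (altBfs adj)) k
          (chosen :: rest) =
          altSolveLoop adj ((List.range adj.length).map (altBfs adj)) k rest := by
        show (match altTotalLoop ((List.range adj.length).map (altBfs adj)) chosen
            (List.range adj.length) 0 with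
          | none => altSolveLoop adj ((List.range adj.length).map (altBfs adj)) k rest
          | some total =>
            if total ≤ (adj.length : Int) - k then
              some (chosen.foldl (fun c v => c.set v 1)
                (List.replicate adj.length (0 : Int)))
            else altSolveLoop adj ((List.range adj.length).map (altBfs adj)) k rest) = _
        rw [htl]
      rw [hunf2]
      show advSolveLoop adj k rest = _
      exact hrest
    · rw [htl] at hpc
      have hf : adv_is_feasible_pmedian adj
          (chosen.foldl (fun c v => c.set v 1) (List.replicate adj.length (0 : Int))) k =
          decide (total ≤ (adj.length : Int) - k) := hpc
      rw [hf]
      have hunf2 : altSolveLoop adj ((List.range adj.length).map (altBfs adj)) k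
          (chosen :: rest) =
          (if total ≤ (adj.length : Int) - k then
            some (chosen.foldl (fun c v => c.set v 1)
              (List.replicate adj.length (0 : Int)))
          else altSolveLoop adj ((List.range adj.length).map (altBfs adj)) k rest) := by
        show (match altTotalLoop ((List.range adj.length).map (altBfs adj)) chosen
            (List.range adj.length) 0 with
          | none => altSolveLoop adj ((List.range adj.length).map (altBfs adj)) k rest
          | some total =>
            if total ≤ (adj.length : Int) - k then
              some (chosen.foldl (fun c v => c.set v 1)
                (List.replicate adj.length (0 : Int)))
            else altSolveLoop adj ((List.range adj.length).map (altBfs adj)) k rest) = _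
        rw [htl]
      rw [hunf2]
      by_cases hle : total ≤ (adj.length : Int) - k
      · rw [if_pos (show decide (total ≤ (adj.length : Int) - k) = true by simp [hle]),
          if_pos hle]
      · rw [if_neg (show ¬ decide (total ≤ (adj.length : Int) - k) = true by simp [hle]),
          if_neg hle]
        exact hrest

-- ===== VERDICT (by name: the statement is the Claim_ definition above) =====
theorem adv_solve_pm_spec : Claim_equal_adv_solve_pm := by
  intro adj k _ hpre
  obtain ⟨hk, hd⟩ := hpre
  show adv_solve_pm adj k = adv_solve_pm_alt adj k
  by_cases hlt : (adj.length : Int) < k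
  · unfold adv_solve_pm adv_solve_pm_alt
    rw [if_pos hlt]
    have hnil : pyCombinations k.toNat (List.range adj.length) = [] := by
      apply pyCombinations_eq_nil
      simp only [List.length_range]
      omega
    rw [hnil]
    rfl
  · have hA := hd.resolve_left hlt
    unfold adv_solve_pm adv_solve_pm_alt
    rw [if_neg hlt]
    apply solve_loop_eq adj k hA hk
    intro c hc
    have hsl := pyCombinations_sublist hc
    refine ⟨hsl.nodup List.nodup_range, ?_, pyCombinations_length hc⟩
    intro v hv
    have := hsl.subset hv
    simpa using this
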